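-- pv_equiv track=rewrite | github.com/22eming/- | 프로그래머스/unrated/154540. 무인도 여행/무인도 여행.py | solution
-- ===== SOURCE A (Python) =====
-- from collections import deque
--
-- def bfs(maps, start, visited):
--     """_summary_
--
--     Args:
--         maps (list): 전체 무인도의 식량 지도
--         start (int): 시작 index [y,x]
--         visited (list): 방문했던 무인도
--
--     Returns:
--         int: 최대 머물 수 있는 날짜
--         list: 지금까지 들른 위치
--     """
--     que = deque([start])
--     max_y, max_x = len(maps), len(maps[0])
--     answer = 0
--
--     while que:
--         y,x = que.popleft()
--         if not visited[y][x]: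
--             answer += int(maps[y][x])
--             visited[y][x] = 1
--             for dy, dx in [[-1,0],[0,1],[1,0],[0,-1]]:
--                 if 0<=y+dy<max_y and 0<=x+dx<max_x and maps[y+dy][x+dx] !="X":
--                     que.append([y+dy,x+dx])
--
--     return answer, visited
--
-- def solution(maps):
--     answer = []
--     maps = [list(m) for m in maps]
--     visited = [[0]*len(maps[0]) for _ in range(len(maps))]
--
--     for y in range(len(maps)):
--         for x in range(len(maps[0])):
--             if not visited[y][x] and maps[y][x] != 'X':
--                 ans, visited = bfs(maps, [y,x], visited)
--                 answer.append(ans)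
--
--     if answer == []:
--         return [-1]
--     else:
--         return sorted(answer)
-- ===== SOURCE B (Python) =====
-- def solution(maps):
--     H, W = len(maps), len(maps[0])
--     N = H * W
--     # label[i] = -1 for water; for land, a cell index that converges to the
--     # smallest index of i's connected component (min-label propagation to a fixpoint)
--     label = [i if maps[i // W][i % W] != 'X' else -1 for i in range(N)]
--     changed = True
--     while changed:
--         changed = False
--         for i in range(N):
--             if label[i] < 0:
--                 continue
--             y, x = divmod(i, W)
--             for j in (i - W if y > 0 else -1, i + W if y < H - 1 else -1,
--                       i - 1 if x > 0 else -1, i + 1 if x < W - 1 else -1):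
--                 if j >= 0 and label[j] >= 0 and label[j] < label[i]:
--                     label[i] = label[j]
--                     changed = True
--     sums = {}
--     for i in range(N):
--         if label[i] >= 0:
--             sums[label[i]] = sums.get(label[i], 0) + int(maps[i // W][i % W])
--     answer = list(sums.values())
--     return sorted(answer) if answer else [-1]
-- ===== Notes on version B (the rewrite author's own statement) =====
-- stated objective: alternative
-- what changed: Replaces per-component BFS flood fill (queue + visited matrix) with whole-grid min-label propagation: every land cell starts labelled with its own index, labels are relaxed to the minimum over land neighbours until a fixpoint, then one dict pass groups food by final label (the component's minimal index) and the dict's values are sorted.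
-- outside the precondition, e.g. on solution([]): A returns [-1], B raises IndexError
import Mathlib
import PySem

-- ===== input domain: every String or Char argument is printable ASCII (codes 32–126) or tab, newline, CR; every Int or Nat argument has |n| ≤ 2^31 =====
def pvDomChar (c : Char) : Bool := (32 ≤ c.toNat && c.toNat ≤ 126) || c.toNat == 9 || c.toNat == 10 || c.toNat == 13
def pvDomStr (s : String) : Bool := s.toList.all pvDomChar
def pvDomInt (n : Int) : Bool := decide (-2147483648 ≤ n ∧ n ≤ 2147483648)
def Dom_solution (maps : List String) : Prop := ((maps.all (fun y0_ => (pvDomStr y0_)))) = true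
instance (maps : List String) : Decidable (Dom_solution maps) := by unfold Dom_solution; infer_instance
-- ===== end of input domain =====

-- B replaces A's per-component BFS (queue + visited matrix) by whole-grid min-label
-- propagation to a fixpoint followed by one dict grouping pass (objective: alternative).

-- ===== PORT A =====
-- shared helper: maps[y][x] as a total lookup (default 'X'); exact whenever the access is in
-- range, which Pre_ guarantees for every access either program performs
def chAt (g : List (List Char)) (y x : Int) : Char :=
  (((PySem.List.pyGet? g y).bind (fun r => PySem.List.pyGet? r x)).getD 'X')

-- shared helper: int(maps[y][x]); exact whenever the char is a digit (guaranteed by Pre_)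
def digitVal (g : List (List Char)) (y x : Int) : Int :=
  (PySem.Int.ofChars? [chAt g y x]).getD 0

-- visited[y][x] as a total lookup (default 1: out-of-range reads never happen under Pre_)
def vget (v : List (List Int)) (y x : Int) : Int :=
  match PySem.List.pyGet? v y with
  | none => 1
  | some row => (PySem.List.pyGet? row x).getD 1

-- visited[y][x] = 1
def vset (v : List (List Int)) (y x : Int) : List (List Int) :=
  match PySem.List.pyIdx? v.length y with
  | none => v
  | some i => v.set i (PySem.List.pySetD (v.getD i []) x 1)

def zeros (v : List (List Int)) : Nat := (v.map (fun r => r.count 0)).sum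

-- helpers for the ports' termination arguments
theorem pyIdx?_lt {n : Nat} {i : Int} {k : Nat} (h : PySem.List.pyIdx? n i = some k) : k < n := by
  simp only [PySem.List.pyIdx?] at h
  split_ifs at h <;> simp_all <;> omega

theorem count_set_lt (row : List Int) (j : Nat) (hj : j < row.length) (h0 : row[j] = 0) :
    (row.set j 1).count 0 < row.count 0 := by
  induction row generalizing j with
  | nil => simp at hj
  | cons a t ih =>
    cases j with
    | zero => simp_all
    | succ j =>
      simp only [List.set_cons_succ, List.count_cons]
      have := ih j (by simpa using hj) (by simpa using h0)
      omega

theorem zeros_set_lt (v : List (List Int)) (i : Nat) (r' : List Int) (hi : i < v.length)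
    (hlt : r'.count 0 < (v[i]).count 0) : zeros (v.set i r') < zeros v := by
  induction v generalizing i with
  | nil => simp at hi
  | cons a t ih =>
    cases i with
    | zero => simp_all [zeros]
    | succ i =>
      simp only [List.set_cons_succ, zeros, List.map_cons, List.sum_cons]
      have := ih i (by simpa using hi) (by simpa using hlt)
      simp only [zeros] at this
      omega

theorem zeros_vset_lt (v : List (List Int)) (y x : Int) (h : vget v y x = 0) :
    zeros (vset v y x) < zeros v := by
  unfold vget at h
  unfold vset
  cases hy : PySem.List.pyIdx? v.length y with
  | none => simp [PySem.List.pyGet?, hy] at h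
  | some i =>
    have hi : i < v.length := pyIdx?_lt hy
    simp only [PySem.List.pyGet?, hy, List.getElem?_eq_getElem hi, Option.bind] at h
    cases hx : PySem.List.pyIdx? (v[i]).length x with
    | none => simp [hx] at h
    | some j =>
      have hj : j < (v[i]).length := pyIdx?_lt hx
      simp only [hx, Option.bind_some, List.getElem?_eq_getElem hj, Option.getD_some] at h
      have hrow : v.getD i [] = v[i] := List.getD_eq_getElem v [] hi
      show zeros (v.set i (PySem.List.pySetD (v.getD i []) x 1)) < zeros v
      rw [hrow]
      have hset : PySem.List.pySetD (v[i]) x 1 = (v[i]).set j 1 := by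
        simp [PySem.List.pySetD, PySem.List.pySet?, hx]
      rw [hset]
      exact zeros_set_lt v i _ hi (count_set_lt _ j hj h)

-- the while-loop of A's bfs; terminates because each iteration either marks an unmarked cell
-- (zeros decreases) or pops the queue
def bfsLoop (g : List (List Char)) (que : List (Int × Int)) (v : List (List Int)) (ans : Int) :
    Int × List (List Int) :=
  match que with
  | [] => (ans, v)
  | (y, x) :: rest =>
    if h : vget v y x = 0 then
      let ans' := ans + digitVal g y x
      let v' := vset v y x
      let que' := rest ++ ([((-1:Int),(0:Int)),(0,1),(1,0),(0,-1)].filterMap (fun d =>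
          if 0 ≤ y + d.1 ∧ y + d.1 < (g.length:Int) ∧ 0 ≤ x + d.2 ∧
             x + d.2 < (((g.headD []).length : Nat) : Int) ∧ chAt g (y+d.1) (x+d.2) ≠ 'X'
          then some (y + d.1, x + d.2) else none))
      bfsLoop g que' v' ans'
    else bfsLoop g rest v ans
termination_by (zeros v, que.length)
decreasing_by
  · exact Prod.Lex.left _ _ (zeros_vset_lt v y x h)
  · exact Prod.Lex.right _ (Nat.lt_succ_self _)

def bfs (g : List (List Char)) (start : Int × Int) (v : List (List Int)) :
    Int × List (List Int) :=
  bfsLoop g [start] v 0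

def solution (maps : List String) : List Int :=
  let g := maps.map (fun m => m.toList)
  let H := g.length
  let W := (g.headD []).length      -- len(maps[0]); Python raises on []: Pre_ excludes []
  let v0 := List.replicate H (List.replicate W (0:Int))
  let res := (PySem.List.pyRange 0 (H:Int) 1).foldl (fun (st : List Int × List (List Int)) y =>
      (PySem.List.pyRange 0 (W:Int) 1).foldl (fun st x =>
        if vget st.2 y x = 0 ∧ chAt g y x ≠ 'X' then
          let r := bfs g (y, x) st.2
          (st.1 ++ [r.1], r.2)
        else st) st) ([], v0)
  if res.1 = [] then [-1] else PySem.List.sorted res.1 (fun a => a) false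

-- ===== PORT B =====
-- label[i] as a total lookup (every read B performs is guarded in range or by `0 ≤ j`)
def lg (l : List Int) (i : Int) : Int := PySem.List.pyGetD l i (-1)

-- maps[i//W][i%W] through the shared total cell lookup
def gch (g : List (List Char)) (W i : Int) : Char :=
  chAt g (PySem.Int.floordiv i W) (PySem.Int.mod i W)

-- int(maps[i//W][i%W])
def digit1 (g : List (List Char)) (W i : Int) : Int :=
  digitVal g (PySem.Int.floordiv i W) (PySem.Int.mod i W)

-- the tuple of four neighbour candidates (-1 = "no neighbour on that side")
def nbrs (H W i : Int) : List Int :=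
  [if PySem.Int.floordiv i W > 0 then i - W else -1,
   if PySem.Int.floordiv i W < H - 1 then i + W else -1,
   if PySem.Int.mod i W > 0 then i - 1 else -1,
   if PySem.Int.mod i W < W - 1 then i + 1 else -1]

-- body of B's inner `for j in (...)` loop
def relaxNbr (i : Int) (st : List Int × Bool) (j : Int) : List Int × Bool :=
  if 0 ≤ j ∧ 0 ≤ lg st.1 j ∧ lg st.1 j < lg st.1 i
  then (PySem.List.pySetD st.1 i (lg st.1 j), true) else st

-- one iteration of B's `for i in range(N)` loop
def relaxCell (H W : Int) (st : List Int × Bool) (i : Int) : List Int × Bool :=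
  if lg st.1 i < 0 then st
  else (nbrs H W i).foldl (relaxNbr i) st

-- one full sweep (one iteration of the `while changed` loop body)
def onePass (H W : Int) (label : List Int) : List Int × Bool :=
  (PySem.List.pyRange 0 (H * W) 1).foldl (relaxCell H W) (label, false)

def sumNat (l : List Int) : Nat := (l.map Int.toNat).sum

-- termination of the while loop: a sweep that reports a change strictly decreased some label
theorem sumNat_set_lt (l : List Int) (k : Nat) (v : Int) (hk : k < l.length)
    (hlt : v.toNat < (l[k]).toNat) : sumNat (l.set k v) < sumNat l := by
  induction l generalizing k with
  | nil => simp at hk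
  | cons a t ih =>
    cases k with
    | zero => simp_all [sumNat]
    | succ k =>
      simp only [List.set_cons_succ, sumNat, List.map_cons, List.sum_cons]
      have := ih k (by simpa using hk) (by simpa using hlt)
      simp only [sumNat] at this
      omega

theorem sumNat_pySetD_lt (l : List Int) (i v : Int) (h0 : 0 <= v) (hlt : v < lg l i) :
    sumNat (PySem.List.pySetD l i v) < sumNat l := by
  cases hidx : PySem.List.pyIdx? l.length i with
  | none =>
    exfalso
    simp [lg, PySem.List.pyGetD, PySem.List.pyGet?, hidx] at hlt
    omega
  | some k =>
    have hk : k < l.length := pyIdx?_lt hidx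
    have hset : PySem.List.pySetD l i v = l.set k v := by
      simp [PySem.List.pySetD, PySem.List.pySet?, hidx]
    have hval : lg l i = l[k] := by
      simp [lg, PySem.List.pyGetD, PySem.List.pyGet?, hidx, List.getElem?_eq_getElem hk]
    rw [hset]
    exact sumNat_set_lt l k v hk (by omega)

theorem relaxNbr_sum (i : Int) (st : List Int × Bool) (j : Int) :
    sumNat (relaxNbr i st j).1 <= sumNat st.1 ∧
    ((relaxNbr i st j).2 = true → st.2 = true ∨ sumNat (relaxNbr i st j).1 < sumNat st.1) := by
  unfold relaxNbr
  split_ifs with h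
  · have := sumNat_pySetD_lt st.1 i (lg st.1 j) h.2.1 h.2.2
    exact ⟨le_of_lt this, fun _ => Or.inr this⟩
  · exact ⟨le_rfl, fun h2 => Or.inl h2⟩

theorem foldl_sum_dec {α : Type} (f : List Int × Bool → α → List Int × Bool)
    (hf : ∀ st a, sumNat (f st a).1 <= sumNat st.1 ∧
      ((f st a).2 = true → st.2 = true ∨ sumNat (f st a).1 < sumNat st.1)) :
    ∀ (L : List α) st, sumNat (L.foldl f st).1 <= sumNat st.1 ∧
      ((L.foldl f st).2 = true → st.2 = true ∨ sumNat (L.foldl f st).1 < sumNat st.1) := by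
  intro L
  induction L with
  | nil => intro st; exact ⟨le_rfl, fun h => Or.inl h⟩
  | cons a L ih =>
    intro st
    rcases hf st a with ⟨h1, h2⟩
    rcases ih (f st a) with ⟨h3, h4⟩
    refine ⟨le_trans h3 h1, ?_⟩
    intro h5
    rcases h4 h5 with h6 | h6
    · rcases h2 h6 with h7 | h7
      · exact Or.inl h7
      · exact Or.inr (lt_of_le_of_lt h3 h7)
    · exact Or.inr (lt_of_lt_of_le h6 h1)

theorem relaxCell_sum (H W : Int) (st : List Int × Bool) (i : Int) :
    sumNat (relaxCell H W st i).1 <= sumNat st.1 ∧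
    ((relaxCell H W st i).2 = true → st.2 = true ∨ sumNat (relaxCell H W st i).1 < sumNat st.1) := by
  unfold relaxCell
  split_ifs with h
  · exact ⟨le_rfl, fun h2 => Or.inl h2⟩
  · exact foldl_sum_dec (relaxNbr i) (relaxNbr_sum i) (nbrs H W i) st

theorem onePass_dec (H W : Int) (l : List Int) (h : (onePass H W l).2 = true) :
    sumNat (onePass H W l).1 < sumNat l := by
  rcases foldl_sum_dec (relaxCell H W) (relaxCell_sum H W) (PySem.List.pyRange 0 (H * W) 1)
    (l, false) with ⟨h1, h2⟩
  rcases h2 h with h3 | h3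
  · simp at h3
  · exact h3

-- B's `while changed` loop
def fixLoop (H W : Int) (label : List Int) : List Int :=
  if h : (onePass H W label).2 = true then fixLoop H W (onePass H W label).1
  else (onePass H W label).1
termination_by sumNat label
decreasing_by exact onePass_dec H W label h

-- B's dict-building loop: sums[label[i]] = sums.get(label[i], 0) + int(maps[i//W][i%W])
def tally (g : List (List Char)) (W : Int) (label : List Int) (N : Int) : PySem.Dict Int Int :=
  (PySem.List.pyRange 0 N 1).foldl (fun d i =>
    if 0 ≤ lg label i then
      d.insert (lg label i) (d.getD (lg label i) 0 + digit1 g W i)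
    else d) PySem.Dict.empty

def solution_alt (maps : List String) : List Int :=
  let g := maps.map (fun m => m.toList)
  let H : Int := g.length
  let W : Int := (g.headD []).length    -- len(maps[0]); Python raises on []: Pre_ excludes []
  let N : Int := H * W
  let label0 := (PySem.List.pyRange 0 N 1).map (fun i => if gch g W i ≠ 'X' then i else -1)
  let lab := fixLoop H W label0
  let answer := (tally g W lab N).values
  if answer = [] then [-1] else PySem.List.sorted answer (fun a => a) false

-- ===== PRECONDITION & SPEC =====
-- Pre_: a nonempty grid (on [] B's len(maps[0]) raises, while A happens to return [-1]), every
-- row at least as long as the first (neither program may read a column ≥ len(maps[0])), and every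
-- cell in those columns a digit or 'X' (otherwise Python's int()/indexing raises midway).
def Pre_solution (maps : List String) : Prop :=
  maps ≠ [] ∧ (maps.all (fun s =>
    decide ((maps.headD "").toList.length ≤ s.toList.length) &&
    (s.toList.take (maps.headD "").toList.length).all (fun c => c == 'X' || c.isDigit))) = true
instance (maps : List String) : Decidable (Pre_solution maps) := by
  unfold Pre_solution; infer_instance

def pvWitness_solution : List String := ["X9X", "111"]

def Spec_solution (maps : List String) (out : List Int) : Prop := out = solution_alt maps
instance (maps : List String) (out : List Int) : Decidable (Spec_solution maps out) := by
  unfold Spec_solution; infer_instance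

-- ===== CLAIM (what is proved, stated in full; the proofs are below) =====
def Claim_equal_solution : Prop :=
  ∀ (maps : List String), Dom_solution maps → Pre_solution maps →
    Spec_solution maps (solution maps)

-- ===== LEMMAS AND PROOFS =====

-- grid geometry
def Wg (g : List (List Char)) : Nat := (g.headD []).length

def inR (g : List (List Char)) (c : Int × Int) : Prop :=
  0 ≤ c.1 ∧ c.1 < (g.length : Int) ∧ 0 ≤ c.2 ∧ c.2 < (Wg g : Int)

def landP (g : List (List Char)) (c : Int × Int) : Prop :=
  inR g c ∧ chAt g c.1 c.2 ≠ 'X'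

def adjP (a b : Int × Int) : Prop :=
  (b.1 = a.1 - 1 ∧ b.2 = a.2) ∨ (b.1 = a.1 ∧ b.2 = a.2 + 1) ∨
  (b.1 = a.1 + 1 ∧ b.2 = a.2) ∨ (b.1 = a.1 ∧ b.2 = a.2 - 1)

def stp (g : List (List Char)) (a b : Int × Int) : Prop := landP g a ∧ landP g b ∧ adjP a b

def reach (g : List (List Char)) (s c : Int × Int) : Prop := Relation.ReflTransGen (stp g) s c

abbrev mkd (v : List (List Int)) (c : Int × Int) : Prop := vget v c.1 c.2 ≠ 0

def allCells (g : List (List Char)) : List (Int × Int) :=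
  (PySem.List.pyRange 0 (g.length : Int) 1).flatMap
    (fun y => (PySem.List.pyRange 0 ((Wg g : Nat) : Int) 1).map (fun x => (y, x)))

def shapeOf (g : List (List Char)) (v : List (List Int)) : Prop :=
  v.length = g.length ∧ ∀ r ∈ v, r.length = Wg g

def relSum (g : List (List Char)) (v w : List (List Int)) : Int :=
  ((allCells g).map
    (fun c => if mkd w c ∧ ¬ mkd v c then digitVal g c.1 c.2 else 0)).sum

-- A's per-cell scan step, named for the proofs
def stepCell (g : List (List Char)) (st : List Int × List (List Int)) (c : Int × Int) :
    List Int × List (List Int) :=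
  if vget st.2 c.1 c.2 = 0 ∧ chAt g c.1 c.2 ≠ 'X' then
    let r := bfs g c st.2
    (st.1 ++ [r.1], r.2)
  else st

-- geometry facts
theorem adjP_symm {a b : Int × Int} (h : adjP a b) : adjP b a := by
  rcases a with ⟨ay, ax⟩; rcases b with ⟨by_, bx⟩
  unfold adjP at *; dsimp at *; omega

theorem stp_symm {g : List (List Char)} {a b : Int × Int} (h : stp g a b) : stp g b a :=
  ⟨h.2.1, h.1, adjP_symm h.2.2⟩

theorem reach_symm {g : List (List Char)} {a b : Int × Int} (h : reach g a b) : reach g b a :=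
  Relation.ReflTransGen.symmetric (fun _ _ hab => stp_symm hab) h

theorem reach_land {g : List (List Char)} {s c : Int × Int} (h : reach g s c)
    (hs : landP g s) : landP g c := by
  induction h with
  | refl => exact hs
  | tail _ h2 _ => exact h2.2.1

theorem closed_reach {g : List (List Char)} (S : Int × Int → Prop) {s c : Int × Int}
    (hs : S s) (hcl : ∀ a, S a → ∀ b, stp g a b → S b) (h : reach g s c) : S c := by
  induction h with
  | refl => exact hs
  | tail h1 h2 ih => exact hcl _ ih _ h2

theorem not_mkd_of_reach {g : List (List Char)} {v : List (List Int)} {s c : Int × Int}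
    (hcl : ∀ a, inR g a → mkd v a → ∀ b, stp g a b → mkd v b)
    (hs : ¬ mkd v s) (h : reach g s c) (hc : mkd v c) : False := by
  have hcs := reach_symm h
  exact hs (closed_reach (fun e => mkd v e) hc
    (fun a ha b hab => hcl a hab.1.1 ha b hab) hcs)

theorem adjP_pair_iff (y x : Int) (b : Int × Int) :
    adjP (y, x) b ↔ b ∈ [(y - 1, x), (y + 1, x), (y, x - 1), (y, x + 1)] := by
  rcases b with ⟨by_, bx⟩
  simp [adjP, Prod.ext_iff]; omega

-- vget / vset facts
theorem pyIdx?_of_nonneg {n : Nat} {i : Int} (h : 0 ≤ i) :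
    PySem.List.pyIdx? n i = if i < (n : Int) then some i.toNat else none := by
  simp [PySem.List.pyIdx?, h]

theorem pySetD_length (row : List Int) (x : Int) :
    (PySem.List.pySetD row x 1).length = row.length := by
  simp only [PySem.List.pySetD, PySem.List.pySet?]
  cases h : PySem.List.pyIdx? row.length x <;> simp

theorem vset_some {v : List (List Int)} {y : Int} {i : Nat} (x : Int)
    (hyi : PySem.List.pyIdx? v.length y = some i) :
    vset v y x = v.set i (PySem.List.pySetD (v.getD i []) x 1) := by
  unfold vset; rw [hyi]

theorem vset_none {v : List (List Int)} {y : Int} (x : Int)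
    (hyi : PySem.List.pyIdx? v.length y = none) : vset v y x = v := by
  unfold vset; rw [hyi]

theorem vget_replicate0 {H W : Nat} {y x : Int} (hy0 : 0 ≤ y) (hy : y < (H : Int))
    (hx0 : 0 ≤ x) (hx : x < (W : Int)) :
    vget (List.replicate H (List.replicate W (0 : Int))) y x = 0 := by
  have hyn : y.toNat < H := by omega
  have hxn : x.toNat < W := by omega
  simp [vget, PySem.List.pyGet?, pyIdx?_of_nonneg hy0, pyIdx?_of_nonneg hx0, hy, hx,
    List.getElem?_replicate, hyn, hxn]

theorem vget_vset_self (v : List (List Int)) (y x : Int) :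
    vget (vset v y x) y x = 1 := by
  cases hy : PySem.List.pyIdx? v.length y with
  | none => rw [vset_none x hy]; simp [vget, PySem.List.pyGet?, hy]
  | some i =>
    rw [vset_some x hy]
    unfold vget
    have hi : i < v.length := pyIdx?_lt hy
    have hlen : (v.set i (PySem.List.pySetD (v.getD i []) x 1)).length = v.length := by simp
    simp only [PySem.List.pyGet?, hlen, hy, Option.bind]
    rw [List.getElem?_set_self (by omega)]
    have hrow : v.getD i [] = v[i] := List.getD_eq_getElem v [] hi
    rw [hrow]
    have hrl : (PySem.List.pySetD (v[i]) x 1).length = (v[i]).length := pySetD_length _ _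
    cases hx : PySem.List.pyIdx? (v[i]).length x with
    | none => simp [hrl, hx]
    | some j =>
      have hj : j < (v[i]).length := pyIdx?_lt hx
      have hset : PySem.List.pySetD (v[i]) x 1 = (v[i]).set j 1 := by
        simp [PySem.List.pySetD, PySem.List.pySet?, hx]
      simp only [hset, hrl]
      simp only [List.length_set, hx]
      rw [List.getElem?_set_self (by omega)]
      rfl

theorem vget_vset_ne {v : List (List Int)} {y x y' x' : Int}
    (hy : 0 ≤ y) (hx : 0 ≤ x) (hy' : 0 ≤ y') (hx' : 0 ≤ x')
    (hne : (y', x') ≠ (y, x)) : vget (vset v y x) y' x' = vget v y' x' := by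
  cases hyi : PySem.List.pyIdx? v.length y with
  | none => rw [vset_none x hyi]
  | some i =>
    have hi : i < v.length := pyIdx?_lt hyi
    have hrow : v.getD i [] = v[i] := List.getD_eq_getElem v [] hi
    rw [vset_some x hyi, hrow]
    unfold vget
    have hlen : (v.set i (PySem.List.pySetD (v[i]) x 1)).length = v.length := by simp
    simp only [PySem.List.pyGet?, hlen]
    by_cases hyy : y' = y
    · subst hyy
      have hxx : x' ≠ x := by
        intro h; exact hne (by simp [h, Prod.ext_iff])
      simp only [hyi, Option.bind]
      rw [List.getElem?_set_self (by omega)]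
      rw [List.getElem?_eq_getElem hi]
      simp only []
      have hrl := pySetD_length (v[i]) x
      cases hxi : PySem.List.pyIdx? (v[i]).length x with
      | none =>
        have : PySem.List.pySetD (v[i]) x 1 = v[i] := by
          simp [PySem.List.pySetD, PySem.List.pySet?, hxi]
        rw [this]
      | some j =>
        have hj : j < (v[i]).length := pyIdx?_lt hxi
        have hset : PySem.List.pySetD (v[i]) x 1 = (v[i]).set j 1 := by
          simp [PySem.List.pySetD, PySem.List.pySet?, hxi]
        rw [hset]
        simp only [List.length_set]
        cases hxi' : PySem.List.pyIdx? (v[i]).length x' with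
        | none => rfl
        | some j' =>
          have hj' : j' < (v[i]).length := pyIdx?_lt hxi'
          have hjj : j' ≠ j := by
            rw [pyIdx?_of_nonneg hx] at hxi
            rw [pyIdx?_of_nonneg hx'] at hxi'
            split_ifs at hxi hxi' <;> simp_all <;> omega
          simp only [Option.bind]
          rw [List.getElem?_set_ne (by omega)]
    · cases hyi' : PySem.List.pyIdx? v.length y' with
      | none => rfl
      | some i' =>
        have hi' : i' < v.length := pyIdx?_lt hyi'
        have hii : i' ≠ i := by
          rw [pyIdx?_of_nonneg hy] at hyi
          rw [pyIdx?_of_nonneg hy'] at hyi'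
          split_ifs at hyi hyi' <;> simp_all <;> omega
        simp only [Option.bind]
        rw [List.getElem?_set_ne (by omega)]

theorem shapeOf_vset {g : List (List Char)} {v : List (List Int)} (y x : Int)
    (h : shapeOf g v) : shapeOf g (vset v y x) := by
  cases hy : PySem.List.pyIdx? v.length y with
  | none => rw [vset_none x hy]; exact h
  | some i =>
    rw [vset_some x hy]
    have hi : i < v.length := pyIdx?_lt hy
    refine ⟨by simpa using h.1, fun r hr => ?_⟩
    rcases List.mem_or_eq_of_mem_set hr with hro | hre
    · exact h.2 r hro
    · subst hre
      rw [pySetD_length, List.getD_eq_getElem v [] hi]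
      exact h.2 _ (List.getElem_mem hi)

theorem mkd_vset {v : List (List Int)} {c : Int × Int} {wy wx : Int}
    (hc1 : 0 ≤ c.1) (hc2 : 0 ≤ c.2) (hw1 : 0 ≤ wy) (hw2 : 0 ≤ wx) :
    mkd (vset v wy wx) c ↔ c = (wy, wx) ∨ mkd v c := by
  by_cases hcw : c = (wy, wx)
  · subst hcw
    unfold mkd
    dsimp only
    rw [vget_vset_self]
    simp
  · have hne : (c.1, c.2) ≠ (wy, wx) := by
      simp only [ne_eq, Prod.mk.injEq, not_and]
      intro h1 h2
      exact hcw (Prod.ext h1 h2)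
    unfold mkd
    rw [vget_vset_ne hw1 hw2 hc1 hc2 hne]
    simp [hcw]

-- allCells facts
theorem mem_allCells {g : List (List Char)} {c : Int × Int} :
    c ∈ allCells g ↔ inR g c := by
  rcases c with ⟨cy, cx⟩
  simp only [allCells, List.mem_flatMap, List.mem_map, PySem.List.mem_pyRange_one,
    Prod.mk.injEq, inR]
  constructor
  · rintro ⟨y, hy, x, hx, hxy, hxx⟩
    subst hxy; subst hxx
    exact ⟨hy.1, hy.2, hx.1, hx.2⟩
  · rintro ⟨h1, h2, h3, h4⟩
    exact ⟨cy, ⟨h1, h2⟩, cx, ⟨h3, h4⟩, rfl, rfl⟩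

theorem nodup_allCells (g : List (List Char)) : (allCells g).Nodup := by
  rw [allCells, List.nodup_flatMap]
  constructor
  · intro y _
    exact (PySem.List.nodup_pyRange_one 0 _).map
      (fun a b h => by simpa using congrArg Prod.snd h)
  · refine (PySem.List.nodup_pyRange_one 0 _).imp ?_
    intro y y' hne
    intro p hp hp'
    simp only [List.mem_map] at hp hp'
    rcases hp with ⟨x, _, rfl⟩
    rcases hp' with ⟨x', _, he⟩
    exact hne (by simpa using (congrArg Prod.fst he).symm)

-- sum facts
theorem sum_map_congr_mem {α : Type} (L : List α) (f h : α → Int)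
    (hfg : ∀ c ∈ L, f c = h c) : (L.map f).sum = (L.map h).sum := by
  rw [List.map_congr_left hfg]

theorem sum_map_single_diff {α : Type} [DecidableEq α] (L : List α) (f h : α → Int)
    (hnd : L.Nodup) (c0 : α) (hc0 : c0 ∈ L)
    (hfg : ∀ c ∈ L, c ≠ c0 → f c = h c) :
    (L.map f).sum = (L.map h).sum + (f c0 - h c0) := by
  induction L with
  | nil => simp at hc0
  | cons a L ih =>
    rcases List.nodup_cons.mp hnd with ⟨haL, hndL⟩
    by_cases hac : c0 = a
    · subst hac
      have : ∀ c ∈ L, f c = h c := fun c hc =>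
        hfg c (List.mem_cons_of_mem _ hc) (fun he => haL (he ▸ hc))
      simp only [List.map_cons, List.sum_cons, List.map_congr_left this]
      ring
    · have hc0L : c0 ∈ L := by
        rcases List.mem_cons.mp hc0 with h1 | h1
        · exact absurd h1 hac
        · exact h1
      have hfa : f a = h a := hfg a List.mem_cons_self (fun he => hac (he.symm))
      simp only [List.map_cons, List.sum_cons,
        ih hndL hc0L (fun c hc hne => hfg c (List.mem_cons_of_mem _ hc) hne), hfa]
      ring

set_option maxHeartbeats 2000000 in
theorem bfsLoop_spec (g : List (List Char)) (seed : Int × Int) (v0 : List (List Int)) :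
    ∀ que v ans,
    (∀ q ∈ que, landP g q ∧ reach g seed q) →
    shapeOf g v →
    (∀ c, inR g c → mkd v0 c → mkd v c) →
    (∀ c, inR g c → mkd v c → mkd v0 c ∨ (landP g c ∧ reach g seed c)) →
    (∀ c, inR g c → mkd v c → ¬ mkd v0 c → ∀ b, stp g c b → mkd v b ∨ b ∈ que) →
    shapeOf g (bfsLoop g que v ans).2 ∧
    (∀ c, inR g c → mkd v c → mkd (bfsLoop g que v ans).2 c) ∧
    (∀ c, inR g c → mkd (bfsLoop g que v ans).2 c →
        mkd v c ∨ (landP g c ∧ reach g seed c)) ∧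
    (∀ q ∈ que, mkd (bfsLoop g que v ans).2 q) ∧
    (∀ c, inR g c → mkd (bfsLoop g que v ans).2 c → ¬ mkd v0 c →
        ∀ b, stp g c b → mkd (bfsLoop g que v ans).2 b) ∧
    (bfsLoop g que v ans).1 = ans + relSum g v (bfsLoop g que v ans).2 := by
  intro que v ans
  induction que, v, ans using bfsLoop.induct (g := g) with
  | case1 v ans =>
    intro hque hsh hmono hnew hpend
    have hrel : relSum g v v = 0 := by
      refine List.sum_eq_zero ?_
      intro z hz
      rcases List.mem_map.mp hz with ⟨c, _, rfl⟩
      simp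
    simp only [bfsLoop]
    exact ⟨hsh, fun c _ h => h, fun c _ h => Or.inl h, by simp, 
      fun c hc hm hm0 b hb => by
        rcases hpend c hc hm hm0 b hb with h1 | h1
        · exact h1
        · simp at h1, by rw [hrel]; ring⟩
  | case2 v ans y x rest h ans' v' que' ih =>
    intro hque hsh hmono hnew hpend
    have hql := hque (y, x) List.mem_cons_self
    have hinw : inR g (y, x) := hql.1.1
    have hy1 : 0 ≤ y := hinw.1
    have hx1 : 0 ≤ x := hinw.2.2.1
    have hnm : ¬ mkd v (y, x) := by simp [mkd, h]
    have hmk : ∀ c, inR g c → (mkd (vset v y x) c ↔ c = (y, x) ∨ mkd v c) :=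
      fun c hc => mkd_vset hc.1 hc.2.2.1 hy1 hx1
    have hquemem : ∀ q ∈ que', landP g q ∧ reach g seed q := by
      intro q hq
      rcases List.mem_append.mp hq with hq1 | hq1
      · exact hque q (List.mem_cons_of_mem _ hq1)
      · rcases List.mem_filterMap.mp hq1 with ⟨d, hd, heq⟩
        split_ifs at heq with hcond
        · cases heq
          have hland : landP g (y + d.1, x + d.2) :=
            ⟨⟨hcond.1, hcond.2.1, hcond.2.2.1, hcond.2.2.2.1⟩, hcond.2.2.2.2⟩
          refine ⟨hland, hql.2.tail ⟨hql.1, hland, ?_⟩⟩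
          simp only [List.mem_cons, List.not_mem_nil, or_false] at hd
          rcases hd with rfl | rfl | rfl | rfl <;> (unfold adjP; dsimp; omega)
    have hsh' : shapeOf g v' := shapeOf_vset y x hsh
    have hmono' : ∀ c, inR g c → mkd v0 c → mkd v' c := fun c hc hm0 =>
      (hmk c hc).mpr (Or.inr (hmono c hc hm0))
    have hnew' : ∀ c, inR g c → mkd v' c → mkd v0 c ∨ (landP g c ∧ reach g seed c) := by
      intro c hc hm'
      rcases (hmk c hc).mp hm' with rfl | hm2
      · exact Or.inr ⟨hql.1, hql.2⟩
      · exact hnew c hc hm2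
    have hpend' : ∀ c, inR g c → mkd v' c → ¬ mkd v0 c →
        ∀ b, stp g c b → mkd v' b ∨ b ∈ que' := by
      intro c hc hm' hm0 b hb
      have hinb : inR g b := hb.2.1.1
      rcases (hmk c hc).mp hm' with rfl | hm2
      · right
        refine List.mem_append_right _ (List.mem_filterMap.mpr ?_)
        have hlb := hb.2.1
        rcases b with ⟨b1, b2⟩
        rcases hb.2.2 with ⟨e1, e2⟩ | ⟨e1, e2⟩ | ⟨e1, e2⟩ | ⟨e1, e2⟩ <;> dsimp at e1 e2
        · refine ⟨(-1, 0), by simp, ?_⟩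
          dsimp only
          have hr1 : y + (-1 : Int) = b1 := by omega
          have hr2 : x + (0 : Int) = b2 := by omega
          rw [hr1, hr2, dif_pos ⟨hlb.1.1, hlb.1.2.1, hlb.1.2.2.1, hlb.1.2.2.2, hlb.2⟩]
        · refine ⟨(0, 1), by simp, ?_⟩
          dsimp only
          have hr1 : y + (0 : Int) = b1 := by omega
          have hr2 : x + (1 : Int) = b2 := by omega
          rw [hr1, hr2, dif_pos ⟨hlb.1.1, hlb.1.2.1, hlb.1.2.2.1, hlb.1.2.2.2, hlb.2⟩]
        · refine ⟨(1, 0), by simp, ?_⟩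
          dsimp only
          have hr1 : y + (1 : Int) = b1 := by omega
          have hr2 : x + (0 : Int) = b2 := by omega
          rw [hr1, hr2, dif_pos ⟨hlb.1.1, hlb.1.2.1, hlb.1.2.2.1, hlb.1.2.2.2, hlb.2⟩]
        · refine ⟨(0, -1), by simp, ?_⟩
          dsimp only
          have hr1 : y + (0 : Int) = b1 := by omega
          have hr2 : x + (-1 : Int) = b2 := by omega
          rw [hr1, hr2, dif_pos ⟨hlb.1.1, hlb.1.2.1, hlb.1.2.2.1, hlb.1.2.2.2, hlb.2⟩]
      · rcases hpend c hc hm2 hm0 b hb with hmb | hbq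
        · exact Or.inl ((hmk b hinb).mpr (Or.inr hmb))
        · rcases List.mem_cons.mp hbq with rfl | hbr
          · exact Or.inl ((hmk _ hinb).mpr (Or.inl rfl))
          · exact Or.inr (List.mem_append_left _ hbr)
    have IH := ih hquemem hsh' hmono' hnew' hpend'
    have hstep : bfsLoop g ((y, x) :: rest) v ans = bfsLoop g que' v' ans' := by
      conv_lhs => rw [bfsLoop]
      simp only [dif_pos h]
      rfl
    rw [hstep]
    obtain ⟨c1, c2, c3, c4, c5, c6⟩ := IH
    have hmkw : mkd (bfsLoop g que' v' ans').2 (y, x) :=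
      c2 (y, x) hinw ((hmk (y, x) hinw).mpr (Or.inl rfl))
    refine ⟨c1, ?_, ?_, ?_, c5, ?_⟩
    · exact fun c hc hm2 => c2 c hc ((hmk c hc).mpr (Or.inr hm2))
    · intro c hc hmr
      rcases c3 c hc hmr with hm' | hr
      · rcases (hmk c hc).mp hm' with rfl | hm2
        · exact Or.inr ⟨hql.1, hql.2⟩
        · exact Or.inl hm2
      · exact Or.inr hr
    · intro q hq
      rcases List.mem_cons.mp hq with rfl | hqr
      · exact hmkw
      · exact c4 q (List.mem_append_left _ hqr)
    · have hdiff : relSum g v (bfsLoop g que' v' ans').2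
          = relSum g v' (bfsLoop g que' v' ans').2 + digitVal g y x := by
        have := sum_map_single_diff (allCells g)
          (fun c => if mkd (bfsLoop g que' v' ans').2 c ∧ ¬ mkd v c then digitVal g c.1 c.2 else 0)
          (fun c => if mkd (bfsLoop g que' v' ans').2 c ∧ ¬ mkd v' c then digitVal g c.1 c.2 else 0)
          (nodup_allCells g) (y, x) (mem_allCells.mpr hinw) ?_
        · unfold relSum
          rw [this]
          have h1 : (if mkd (bfsLoop g que' v' ans').2 (y, x) ∧ ¬ mkd v (y, x)
              then digitVal g y x else 0) = digitVal g y x := if_pos ⟨hmkw, hnm⟩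
          have h2 : (if mkd (bfsLoop g que' v' ans').2 (y, x) ∧ ¬ mkd v' (y, x)
              then digitVal g y x else 0) = 0 :=
            if_neg (fun hco => hco.2 ((hmk (y, x) hinw).mpr (Or.inl rfl)))
          dsimp only
          rw [h1, h2]
          ring
        · intro c hcm hcne
          have hc : inR g c := mem_allCells.mp hcm
          have : (mkd (bfsLoop g que' v' ans').2 c ∧ ¬ mkd v c)
              ↔ (mkd (bfsLoop g que' v' ans').2 c ∧ ¬ mkd v' c) := by
            rw [hmk c hc]
            simp [hcne]
          exact if_congr this rfl rfl
      rw [c6, hdiff]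
      ring
  | case3 v ans y x rest h ih =>
    intro hque hsh hmono hnew hpend
    have hm : mkd v (y, x) := h
    have hque' : ∀ q ∈ rest, landP g q ∧ reach g seed q :=
      fun q hq => hque q (List.mem_cons_of_mem _ hq)
    have hpend' : ∀ c, inR g c → mkd v c → ¬ mkd v0 c →
        ∀ b, stp g c b → mkd v b ∨ b ∈ rest := by
      intro c hc hmc hm0 b hb
      rcases hpend c hc hmc hm0 b hb with h1 | h1
      · exact Or.inl h1
      · rcases List.mem_cons.mp h1 with rfl | h2
        · exact Or.inl hm
        · exact Or.inr h2
    have IH := ih hque' hsh hmono hnew hpend'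
    have hstep : bfsLoop g ((y, x) :: rest) v ans = bfsLoop g rest v ans := by
      conv_lhs => rw [bfsLoop]
      simp only [dif_neg h]
    rw [hstep]
    obtain ⟨c1, c2, c3, c4, c5, c6⟩ := IH
    refine ⟨c1, c2, c3, ?_, c5, c6⟩
    intro q hq
    rcases List.mem_cons.mp hq with rfl | hqr
    · exact c2 _ (hque _ List.mem_cons_self).1.1 hm
    · exact c4 q hqr

theorem bfs_spec (g : List (List Char)) (seed : Int × Int) (v : List (List Int))
    (hland : landP g seed) (hsh : shapeOf g v)
    (hml : ∀ c, inR g c → mkd v c → landP g c)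
    (hcl : ∀ c, inR g c → mkd v c → ∀ b, stp g c b → mkd v b)
    (hm : ¬ mkd v seed) :
    shapeOf g (bfs g seed v).2 ∧
    (∀ c, inR g c → (mkd (bfs g seed v).2 c ↔ mkd v c ∨ reach g seed c)) ∧
    (∀ c, inR g c → ((mkd (bfs g seed v).2 c ∧ ¬ mkd v c) ↔ reach g seed c)) ∧
    (∀ c, inR g c → mkd (bfs g seed v).2 c → landP g c) ∧
    (∀ c, inR g c → mkd (bfs g seed v).2 c → ∀ b, stp g c b → mkd (bfs g seed v).2 b) ∧
    (bfs g seed v).1 = relSum g v (bfs g seed v).2 := by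
  have B := bfsLoop_spec g seed v [seed] v 0
    (by
      intro q hq
      rcases List.mem_cons.mp hq with rfl | hq0
      · exact ⟨hland, Relation.ReflTransGen.refl⟩
      · simp at hq0)
    hsh (fun c _ hm0 => hm0) (fun c _ hm0 => Or.inl hm0)
    (fun c _ hmc hm0 => absurd hmc hm0)
  obtain ⟨c1, c2, c3, c4, c5, c6⟩ := B
  have hbfs : bfs g seed v = bfsLoop g [seed] v 0 := rfl
  rw [hbfs]
  have hiff : ∀ c, inR g c → (mkd (bfsLoop g [seed] v 0).2 c ↔ mkd v c ∨ reach g seed c) := by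
    intro c hc
    constructor
    · intro hm
      rcases c3 c hc hm with h1 | h1
      · exact Or.inl h1
      · exact Or.inr h1.2
    · intro hm
      rcases hm with h1 | h1
      · exact c2 c hc h1
      · refine closed_reach (fun e => mkd (bfsLoop g [seed] v 0).2 e)
          (c4 seed List.mem_cons_self) ?_ h1
        intro a ha b hab
        have hina : inR g a := hab.1.1
        have hinb : inR g b := hab.2.1.1
        by_cases hva : mkd v a
        · exact c2 b hinb (hcl a hina hva b hab)
        · exact c5 a hina ha hva b hab
  refine ⟨c1, hiff, ?_, ?_, ?_, by rw [c6]; ring⟩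
  · intro c hc
    constructor
    · intro hm
      rcases (hiff c hc).mp hm.1 with h1 | h1
      · exact absurd h1 hm.2
      · exact h1
    · intro hr
      refine ⟨(hiff c hc).mpr (Or.inr hr), ?_⟩
      intro hvc
      exact not_mkd_of_reach hcl hm hr hvc
  · intro c hc hm
    rcases (hiff c hc).mp hm with h1 | h1
    · exact hml c hc h1
    · exact reach_land h1 hland
  · intro c hc hm b hb
    have hinb : inR g b := hb.2.1.1
    by_cases hva : mkd v c
    · exact c2 b hinb (hcl c hc hva b hb)
    · exact c5 c hc hm hva b hb


-- 1-D index ↔ 2-D cell arithmetic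
def cellI (W i : Int) : Int × Int := (PySem.Int.floordiv i W, PySem.Int.mod i W)

def idxg (W : Int) (c : Int × Int) : Int := c.1 * W + c.2

theorem cellI_of (W i y x : Int) (hW : 0 < W) (hx0 : 0 ≤ x) (hxW : x < W)
    (he : i = y * W + x) : cellI W i = (y, x) := by
  have h1 : i / W = y := by
    rw [he, show y * W + x = x + y * W by ring, Int.add_mul_ediv_right _ _ (ne_of_gt hW),
      Int.ediv_eq_zero_of_lt hx0 hxW]
    ring
  have h2 : i % W = x := by
    rw [he, show y * W + x = x + y * W by ring, Int.add_mul_emod_self_right,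
      Int.emod_eq_of_lt hx0 hxW]
  simp [cellI, PySem.Int.floordiv_eq_ediv_of_pos hW, PySem.Int.mod_eq_emod_of_pos hW, h1, h2]

theorem idxg_cellI (W i : Int) : idxg W (cellI W i) = i := by
  simpa [idxg, cellI] using PySem.Int.floordiv_mul_add_mod i W

theorem cellI_idxg (W : Int) (c : Int × Int) (hW : 0 < W) (hx0 : 0 ≤ c.2) (hxW : c.2 < W) :
    cellI W (idxg W c) = c := by
  rcases c with ⟨y, x⟩
  exact cellI_of W _ y x hW hx0 hxW rfl

theorem cellI_facts (W i : Int) (hW : 0 < W) (hi0 : 0 ≤ i) :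
    0 ≤ (cellI W i).1 ∧ 0 ≤ (cellI W i).2 ∧ (cellI W i).2 < W ∧
    (cellI W i).1 * W + (cellI W i).2 = i := by
  refine ⟨?_, PySem.Int.mod_nonneg _ hW, PySem.Int.mod_lt _ hW, ?_⟩
  · simp only [cellI, PySem.Int.floordiv_eq_ediv_of_pos hW]
    exact Int.ediv_nonneg hi0 (le_of_lt hW)
  · simpa [idxg] using idxg_cellI W i

theorem cellI_fst_lt (H W i : Int) (hW : 0 < W) (hi0 : 0 ≤ i) (hiN : i < H * W) :
    (cellI W i).1 < H := by
  simp only [cellI, PySem.Int.floordiv_eq_ediv_of_pos hW]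
  exact (Int.ediv_lt_iff_lt_mul hW).mpr hiN

theorem idxg_lt (H W : Int) (c : Int × Int) (hW : 0 < W) (hy : c.1 < H) (hx : c.2 < W) :
    idxg W c < H * W := by
  have h1 : c.1 + 1 ≤ H := by omega
  have h2 : (c.1 + 1) * W ≤ H * W := mul_le_mul_of_nonneg_right h1 (le_of_lt hW)
  have h3 : (c.1 + 1) * W = c.1 * W + W := by ring
  simp only [idxg]
  omega

theorem inR_cellI {g : List (List Char)} (i : Int) (hW : 0 < (Wg g : Int)) (hi0 : 0 ≤ i)
    (hiN : i < (g.length : Int) * (Wg g : Int)) : inR g (cellI (Wg g) i) := by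
  obtain ⟨h1, h2, h3, _⟩ := cellI_facts (Wg g) i hW hi0
  exact ⟨h1, cellI_fst_lt _ _ _ hW hi0 hiN, h2, h3⟩

theorem idxg_inR {g : List (List Char)} (c : Int × Int) (hc : inR g c) :
    0 ≤ idxg (Wg g) c ∧ idxg (Wg g) c < (g.length : Int) * (Wg g : Int) := by
  obtain ⟨h1, h2, h3, h4⟩ := hc
  constructor
  · have : 0 ≤ c.1 * (Wg g : Int) := mul_nonneg h1 (by positivity)
    simp only [idxg]; omega
  · exact idxg_lt _ _ _ (by omega) h2 h4

-- the four neighbour candidates are exactly the adjacent in-range indices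
theorem nbrs_sound (H W i j : Int) (hW : 0 < W) (hi0 : 0 ≤ i) (hiN : i < H * W)
    (hj : j ∈ nbrs H W i) (hj0 : 0 ≤ j) :
    j < H * W ∧ adjP (cellI W i) (cellI W j) := by
  obtain ⟨hy0, hx0, hxW, hsum⟩ := cellI_facts W i hW hi0
  set y := (cellI W i).1 with hyd
  set x := (cellI W i).2 with hxd
  have hyH : y < H := cellI_fst_lt H W i hW hi0 hiN
  have hWmul : (y + 1) * W ≤ H * W := mul_le_mul_of_nonneg_right (by omega) (le_of_lt hW)
  have hWexp : (y + 1) * W = y * W + W := by ring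
  have hcI : cellI W i = (y, x) := by rw [hyd, hxd]
  simp only [nbrs, List.mem_cons, List.not_mem_nil, or_false] at hj
  rcases hj with hj | hj | hj | hj
  · split_ifs at hj with hcond
    · subst hj
      have hcj : cellI W (i - W) = (y - 1, x) :=
        cellI_of W _ _ _ hW hx0 hxW (by rw [sub_mul, one_mul]; omega)
      refine ⟨by omega, ?_⟩
      rw [hcI, hcj, adjP_pair_iff]
      simp
    · omega
  · split_ifs at hj with hcond
    · subst hj
      have hgt : PySem.Int.floordiv i W < H - 1 := hcond
      have hyH1 : y < H - 1 := by rw [hyd]; exact hgt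
      have hcj : cellI W (i + W) = (y + 1, x) :=
        cellI_of W _ _ _ hW hx0 hxW (by rw [add_mul, one_mul]; omega)
      have hWmul2 : (y + 2) * W ≤ H * W := mul_le_mul_of_nonneg_right (by omega) (le_of_lt hW)
      have hWexp2 : (y + 2) * W = y * W + W + W := by ring
      refine ⟨by omega, ?_⟩
      rw [hcI, hcj, adjP_pair_iff]
      simp
    · omega
  · split_ifs at hj with hcond
    · subst hj
      have hx1 : (0:Int) < x := hcond
      have hcj : cellI W (i - 1) = (y, x - 1) :=
        cellI_of W _ _ _ hW (by omega) (by omega) (by omega)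
      refine ⟨by omega, ?_⟩
      rw [hcI, hcj, adjP_pair_iff]
      simp
    · omega
  · split_ifs at hj with hcond
    · subst hj
      have hx1 : x < W - 1 := hcond
      have hcj : cellI W (i + 1) = (y, x + 1) :=
        cellI_of W _ _ _ hW (by omega) (by omega) (by omega)
      refine ⟨by omega, ?_⟩
      rw [hcI, hcj, adjP_pair_iff]
      simp
    · omega

theorem nbrs_complete (H W i j : Int) (hW : 0 < W) (hi0 : 0 ≤ i) (hiN : i < H * W)
    (hj0 : 0 ≤ j) (hjN : j < H * W) (hadj : adjP (cellI W i) (cellI W j)) :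
    j ∈ nbrs H W i := by
  obtain ⟨hy0, hx0, hxW, hsum⟩ := cellI_facts W i hW hi0
  obtain ⟨hy0', hx0', hxW', hsum'⟩ := cellI_facts W j hW hj0
  set y := (cellI W i).1
  set x := (cellI W i).2
  set yj := (cellI W j).1
  set xj := (cellI W j).2
  have hyH : y < H := cellI_fst_lt H W i hW hi0 hiN
  have hyH' : yj < H := cellI_fst_lt H W j hW hj0 hjN
  have hsub : (y - 1) * W = y * W - W := by rw [sub_mul, one_mul]
  have hadd : (y + 1) * W = y * W + W := by rw [add_mul, one_mul]
  have hsub' : (yj - y) * W = yj * W - y * W := by rw [sub_mul]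
  have hadd2 : yj * W = (yj - y) * W + y * W := by ring
  simp only [nbrs, List.mem_cons, List.not_mem_nil, or_false]
  rcases hadj with ⟨e1, e2⟩ | ⟨e1, e2⟩ | ⟨e1, e2⟩ | ⟨e1, e2⟩
  · -- (yj, xj) = (y - 1, x):  j = i - W
    have hjW : (yj : Int) * W = y * W - W := by rw [show yj = y - 1 from e1]; exact hsub
    left
    rw [if_pos (show PySem.Int.floordiv i W > 0 by
      show (0:Int) < y
      by_contra hc
      push_neg at hc
      have : yj < 0 := by omega
      omega)]
    omega
  · -- (yj, xj) = (y, x + 1):  j = i + 1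
    have hjW : (yj : Int) * W = y * W := by rw [show yj = y from e1]
    right; right; right
    rw [if_pos (show PySem.Int.mod i W < W - 1 by
      show x < W - 1
      omega)]
    omega
  · -- (yj, xj) = (y + 1, x):  j = i + W
    have hjW : (yj : Int) * W = y * W + W := by rw [show yj = y + 1 from e1]; exact hadd
    right; left
    rw [if_pos (show PySem.Int.floordiv i W < H - 1 by
      show y < H - 1
      omega)]
    omega
  · -- (yj, xj) = (y, x - 1):  j = i - 1
    have hjW : (yj : Int) * W = y * W := by rw [show yj = y from e1]
    right; right; left
    rw [if_pos (show PySem.Int.mod i W > 0 by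
      show (0:Int) < x
      omega)]
    omega

-- ===== the label-propagation side =====
def NI (g : List (List Char)) : Int := (g.length : Int) * (Wg g : Int)

def GoodL (g : List (List Char)) (l : List Int) : Prop :=
  ∀ i : Int, 0 ≤ i → i < NI g →
    (landP g (cellI (Wg g) i) → 0 ≤ lg l i ∧ lg l i < NI g ∧
        reach g (cellI (Wg g) i) (cellI (Wg g) (lg l i))) ∧
    (¬ landP g (cellI (Wg g) i) → lg l i = -1)

theorem lg_in_range (l : List Int) (i : Int) (h0 : 0 ≤ i) (h : 0 ≤ lg l i) :
    i < (l.length : Int) := by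
  by_contra hc
  push_neg at hc
  have : PySem.List.pyIdx? l.length i = none := by
    rw [pyIdx?_of_nonneg h0, if_neg (by omega)]
  simp [lg, PySem.List.pyGetD, PySem.List.pyGet?, this] at h

theorem lg_pySetD_self (l : List Int) (i v : Int) (h0 : 0 ≤ i) (hi : i < (l.length : Int)) :
    lg (PySem.List.pySetD l i v) i = v := by
  have hidx : PySem.List.pyIdx? l.length i = some i.toNat := by
    rw [pyIdx?_of_nonneg h0, if_pos hi]
  have hset : PySem.List.pySetD l i v = l.set i.toNat v := by
    simp [PySem.List.pySetD, PySem.List.pySet?, hidx]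
  have hlen : (l.set i.toNat v).length = l.length := by simp
  have hidx2 : PySem.List.pyIdx? (l.set i.toNat v).length i = some i.toNat := by
    rw [hlen]; exact hidx
  rw [hset]
  simp only [lg, PySem.List.pyGetD, PySem.List.pyGet?, hlen, hidx, Option.bind]
  rw [List.getElem?_set_self (by omega)]
  rfl

theorem lg_pySetD_ne (l : List Int) (i v k : Int) (h0 : 0 ≤ i) (hk : 0 ≤ k) (hne : k ≠ i) :
    lg (PySem.List.pySetD l i v) k = lg l k := by
  cases hidx : PySem.List.pyIdx? l.length i with
  | none =>
    have : PySem.List.pySetD l i v = l := by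
      simp [PySem.List.pySetD, PySem.List.pySet?, hidx]
    rw [this]
  | some m =>
    have hm : m < l.length := pyIdx?_lt hidx
    have hset : PySem.List.pySetD l i v = l.set m v := by
      simp [PySem.List.pySetD, PySem.List.pySet?, hidx]
    have hmi : m = i.toNat := by
      rw [pyIdx?_of_nonneg h0] at hidx
      split_ifs at hidx <;> simp_all
    rw [hset]
    have hlen : (l.set m v).length = l.length := by simp
    simp only [lg, PySem.List.pyGetD, PySem.List.pyGet?, hlen, pyIdx?_of_nonneg hk]
    split_ifs with hkl
    · simp only [Option.bind]
      rw [List.getElem?_set_ne (by omega)]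
    · rfl

theorem relaxNbr_pres (g : List (List Char)) (i j : Int)
    (hi : 0 ≤ i ∧ i < NI g)
    (hjs : 0 ≤ j → j < NI g ∧ adjP (cellI (Wg g) i) (cellI (Wg g) j))
    (st : List Int × Bool) (hG : GoodL g st.1) :
    GoodL g (relaxNbr i st j).1 ∧
    (∀ k, 0 ≤ k → lg (relaxNbr i st j).1 k ≤ lg st.1 k) := by
  unfold relaxNbr
  split_ifs with h
  · obtain ⟨hj0, hlj, hlt⟩ := h
    obtain ⟨hjN, hadj⟩ := hjs hj0
    have hjland : landP g (cellI (Wg g) j) := by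
      by_contra hw
      have := (hG j hj0 hjN).2 hw
      omega
    have hiland : landP g (cellI (Wg g) i) := by
      by_contra hw
      have := (hG i hi.1 hi.2).2 hw
      omega
    obtain ⟨hjv0, hjvN, hjreach⟩ := (hG j hj0 hjN).1 hjland
    have hilen : i < (st.1.length : Int) := lg_in_range st.1 i hi.1 (by omega)
    constructor
    · intro k hk0 hkN
      by_cases hki : k = i
      · subst hki
        rw [lg_pySetD_self st.1 k _ hk0 hilen]
        refine ⟨fun _ => ⟨by omega, by omega, ?_⟩, fun hw => absurd hiland hw⟩
        exact Relation.ReflTransGen.head ⟨hiland, hjland, hadj⟩ hjreach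
      · rw [lg_pySetD_ne st.1 i _ k hi.1 hk0 hki]
        exact hG k hk0 hkN
    · intro k hk0
      by_cases hki : k = i
      · subst hki
        rw [lg_pySetD_self st.1 k _ hk0 hilen]
        omega
      · rw [lg_pySetD_ne st.1 i _ k hi.1 hk0 hki]
  · exact ⟨hG, fun k _ => le_rfl⟩

theorem foldl_relaxNbr_pres (g : List (List Char)) (i : Int) (hi : 0 ≤ i ∧ i < NI g)
    (L : List Int)
    (hL : ∀ j ∈ L, 0 ≤ j → j < NI g ∧ adjP (cellI (Wg g) i) (cellI (Wg g) j)) :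
    ∀ st, GoodL g st.1 → GoodL g (L.foldl (relaxNbr i) st).1 ∧
      (∀ k, 0 ≤ k → lg (L.foldl (relaxNbr i) st).1 k ≤ lg st.1 k) := by
  induction L with
  | nil => exact fun st hG => ⟨hG, fun k _ => le_rfl⟩
  | cons j L ih =>
    intro st hG
    obtain ⟨h1, h2⟩ := relaxNbr_pres g i j hi (hL j List.mem_cons_self) st hG
    obtain ⟨h3, h4⟩ := ih (fun j' hj' => hL j' (List.mem_cons_of_mem _ hj')) _ h1
    exact ⟨h3, fun k hk => le_trans (h4 k hk) (h2 k hk)⟩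

theorem relaxCell_pres (g : List (List Char)) (hW : 0 < (Wg g : Int)) (i : Int)
    (hi : 0 ≤ i ∧ i < NI g) (st : List Int × Bool) (hG : GoodL g st.1) :
    GoodL g (relaxCell (g.length : Int) (Wg g : Int) st i).1 ∧
    (∀ k, 0 ≤ k → lg (relaxCell (g.length : Int) (Wg g : Int) st i).1 k ≤ lg st.1 k) := by
  unfold relaxCell
  split_ifs with h
  · exact ⟨hG, fun k _ => le_rfl⟩
  · refine foldl_relaxNbr_pres g i hi _ ?_ st hG
    intro j hj hj0
    exact nbrs_sound (g.length : Int) (Wg g : Int) i j hW hi.1 hi.2 hj hj0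

theorem onePass_pres (g : List (List Char)) (hW : 0 < (Wg g : Int)) (l : List Int)
    (hG : GoodL g l) :
    GoodL g (onePass (g.length : Int) (Wg g : Int) l).1 ∧
    (∀ k, 0 ≤ k → lg (onePass (g.length : Int) (Wg g : Int) l).1 k ≤ lg l k) := by
  unfold onePass
  have main : ∀ (L : List Int), (∀ i ∈ L, 0 ≤ i ∧ i < NI g) →
      ∀ st, GoodL g st.1 → GoodL g (L.foldl (relaxCell (g.length : Int) (Wg g : Int)) st).1 ∧
        (∀ k, 0 ≤ k → lg (L.foldl (relaxCell (g.length : Int) (Wg g : Int)) st).1 k ≤ lg st.1 k) := by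
    intro L
    induction L with
    | nil => exact fun _ st hG => ⟨hG, fun k _ => le_rfl⟩
    | cons i L ih =>
      intro hmem st hGst
      obtain ⟨h1, h2⟩ := relaxCell_pres g hW i (hmem i List.mem_cons_self) st hGst
      obtain ⟨h3, h4⟩ := ih (fun i' hi' => hmem i' (List.mem_cons_of_mem _ hi')) _ h1
      exact ⟨h3, fun k hk => le_trans (h4 k hk) (h2 k hk)⟩
  refine main _ ?_ (l, false) hG
  intro i hi
  rw [PySem.List.mem_pyRange_one] at hi
  exact ⟨hi.1, hi.2⟩

-- flag monotonicity and extraction of the fixpoint inequalities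
theorem relaxNbr_flag (i : Int) (st : List Int × Bool) (j : Int) (h : st.2 = true) :
    (relaxNbr i st j).2 = true := by
  unfold relaxNbr
  split_ifs <;> simp_all

theorem foldl_relaxNbr_flag (i : Int) (L : List Int) :
    ∀ st, st.2 = true → (L.foldl (relaxNbr i) st).2 = true := by
  induction L with
  | nil => exact fun st h => h
  | cons j L ih => exact fun st h => ih _ (relaxNbr_flag i st j h)

theorem foldl_relaxNbr_false (i : Int) (L : List Int) :
    ∀ st, (L.foldl (relaxNbr i) st).2 = false →
      L.foldl (relaxNbr i) st = st ∧
      ∀ j ∈ L, ¬(0 ≤ j ∧ 0 ≤ lg st.1 j ∧ lg st.1 j < lg st.1 i) := by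
  induction L with
  | nil => exact fun st _ => ⟨rfl, by simp⟩
  | cons j L ih =>
    intro st hfalse
    simp only [List.foldl_cons] at hfalse ⊢
    by_cases hcond : 0 ≤ j ∧ 0 ≤ lg st.1 j ∧ lg st.1 j < lg st.1 i
    · exfalso
      have hstep : (relaxNbr i st j).2 = true := by
        unfold relaxNbr; rw [if_pos hcond]
      have := foldl_relaxNbr_flag i L _ hstep
      rw [this] at hfalse
      simp at hfalse
    · have hstep : relaxNbr i st j = st := by
        unfold relaxNbr; rw [if_neg hcond]
      rw [hstep] at hfalse ⊢
      obtain ⟨h1, h2⟩ := ih st hfalse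
      refine ⟨h1, ?_⟩
      intro j' hj'
      rcases List.mem_cons.mp hj' with rfl | hj2
      · exact hcond
      · exact h2 j' hj2

theorem relaxCell_flag (H W : Int) (st : List Int × Bool) (i : Int) (h : st.2 = true) :
    (relaxCell H W st i).2 = true := by
  unfold relaxCell
  split_ifs
  · exact h
  · exact foldl_relaxNbr_flag i _ st h

theorem foldl_relaxCell_flag (H W : Int) (L : List Int) :
    ∀ st, st.2 = true → (L.foldl (relaxCell H W) st).2 = true := by
  induction L with
  | nil => exact fun st h => h
  | cons i L ih => exact fun st h => ih _ (relaxCell_flag H W st i h)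

theorem relaxCell_false (H W : Int) (st : List Int × Bool) (i : Int)
    (h : (relaxCell H W st i).2 = false) :
    relaxCell H W st i = st ∧
    (lg st.1 i < 0 ∨ ∀ j ∈ nbrs H W i, ¬(0 ≤ j ∧ 0 ≤ lg st.1 j ∧ lg st.1 j < lg st.1 i)) := by
  unfold relaxCell at h ⊢
  split_ifs at h ⊢ with hneg
  · exact ⟨rfl, Or.inl hneg⟩
  · obtain ⟨h1, h2⟩ := foldl_relaxNbr_false i _ st h
    exact ⟨h1, Or.inr h2⟩

def FixL (H W : Int) (l : List Int) : Prop :=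
  ∀ i : Int, 0 ≤ i → i < H * W →
    lg l i < 0 ∨ ∀ j ∈ nbrs H W i, ¬(0 ≤ j ∧ 0 ≤ lg l j ∧ lg l j < lg l i)

theorem foldl_relaxCell_false (H W : Int) (L : List Int) :
    ∀ st, (L.foldl (relaxCell H W) st).2 = false →
      L.foldl (relaxCell H W) st = st ∧
      ∀ i ∈ L, lg st.1 i < 0 ∨ ∀ j ∈ nbrs H W i, ¬(0 ≤ j ∧ 0 ≤ lg st.1 j ∧ lg st.1 j < lg st.1 i) := by
  induction L with
  | nil => exact fun st _ => ⟨rfl, by simp⟩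
  | cons i L ih =>
    intro st hfalse
    simp only [List.foldl_cons] at hfalse ⊢
    have hstepfalse : (relaxCell H W st i).2 = false := by
      by_contra hc
      have : (relaxCell H W st i).2 = true := by
        cases hb : (relaxCell H W st i).2
        · exact absurd hb hc
        · rfl
      have h2 := foldl_relaxCell_flag H W L _ this
      rw [h2] at hfalse
      simp at hfalse
    obtain ⟨heq, hcond⟩ := relaxCell_false H W st i hstepfalse
    rw [heq] at hfalse ⊢
    obtain ⟨h1, h2⟩ := ih st hfalse
    refine ⟨h1, ?_⟩
    intro i' hi'
    rcases List.mem_cons.mp hi' with rfl | hi2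
    · exact hcond
    · exact h2 i' hi2

theorem onePass_false (H W : Int) (l : List Int) (h : (onePass H W l).2 = false) :
    (onePass H W l).1 = l ∧ FixL H W l := by
  obtain ⟨h1, h2⟩ := foldl_relaxCell_false H W (PySem.List.pyRange 0 (H * W) 1) (l, false) h
  refine ⟨by rw [onePass, h1], ?_⟩
  intro i hi0 hiN
  exact h2 i (PySem.List.mem_pyRange_one.mpr ⟨hi0, hiN⟩)

theorem fixLoop_props (g : List (List Char)) (hW : 0 < (Wg g : Int)) :
    ∀ l, GoodL g l →
      GoodL g (fixLoop (g.length : Int) (Wg g : Int) l) ∧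
      (∀ k, 0 ≤ k → lg (fixLoop (g.length : Int) (Wg g : Int) l) k ≤ lg l k) ∧
      FixL (g.length : Int) (Wg g : Int) (fixLoop (g.length : Int) (Wg g : Int) l) := by
  intro l
  induction l using fixLoop.induct (H := (g.length : Int)) (W := (Wg g : Int)) with
  | case1 l h ih =>
    intro hG
    obtain ⟨hG', hmono'⟩ := onePass_pres g hW l hG
    obtain ⟨h1, h2, h3⟩ := ih hG'
    have hstep : fixLoop (g.length : Int) (Wg g : Int) l
        = fixLoop (g.length : Int) (Wg g : Int) (onePass (g.length : Int) (Wg g : Int) l).1 := by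
      rw [fixLoop, dif_pos h]
    rw [hstep]
    exact ⟨h1, fun k hk => le_trans (h2 k hk) (hmono' k hk), h3⟩
  | case2 l h =>
    intro hG
    have hfalse : (onePass (g.length : Int) (Wg g : Int) l).2 = false := by
      cases hb : (onePass (g.length : Int) (Wg g : Int) l).2
      · rfl
      · exact absurd hb h
    obtain ⟨heq, hfix⟩ := onePass_false _ _ l hfalse
    have hstep : fixLoop (g.length : Int) (Wg g : Int) l
        = (onePass (g.length : Int) (Wg g : Int) l).1 := by
      rw [fixLoop, dif_neg h]
    rw [hstep, heq]
    exact ⟨hG, fun k _ => le_rfl, hfix⟩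

-- range / index bookkeeping
theorem pyRange_natCast_eq (n : Nat) :
    PySem.List.pyRange 0 ((n : Nat) : Int) 1 = (List.range n).map Int.ofNat := by
  rw [PySem.List.pyRange_one]
  simp [List.map_eq_flatMap]

theorem range_flat (Hn Wn : Nat) :
    (List.range Hn).flatMap (fun y => (List.range Wn).map (fun x => y * Wn + x))
      = List.range (Hn * Wn) := by
  induction Hn with
  | zero => simp
  | succ Hn ih =>
    rw [List.range_succ, List.flatMap_append, ih,
      show (Hn + 1) * Wn = Hn * Wn + Wn by ring, List.range_add]
    simp

theorem map_idx_allCells (g : List (List Char)) :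
    (allCells g).map (idxg ((Wg g : Nat) : Int)) = PySem.List.pyRange 0 (NI g) 1 := by
  have hN : NI g = (((g.length * Wg g : Nat)) : Int) := by
    simp [NI]
  rw [hN, allCells, pyRange_natCast_eq (g.length), pyRange_natCast_eq (Wg g),
    pyRange_natCast_eq (g.length * Wg g), ← range_flat g.length (Wg g)]
  rw [List.map_flatMap, List.flatMap_map, List.map_flatMap]
  simp only [List.map_map]
  refine List.flatMap_congr ?_
  intro y _
  refine List.map_congr_left ?_
  intro x _
  simp only [Function.comp, idxg, Int.ofNat_eq_natCast]
  push_cast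
  ring

theorem allCells_pairwise (g : List (List Char)) :
    (allCells g).Pairwise
      (fun a b => idxg ((Wg g : Nat) : Int) a < idxg ((Wg g : Nat) : Int) b) := by
  have h := PySem.List.pairwise_lt_pyRange_one 0 (NI g)
  rw [← map_idx_allCells] at h
  exact List.pairwise_map.mp h

-- the initial label list
theorem label0_lg (g : List (List Char)) (hW : 0 < (Wg g : Int)) (i : Int)
    (hi0 : 0 ≤ i) (hiN : i < NI g) :
    lg ((PySem.List.pyRange 0 (NI g) 1).map
        (fun i => if gch g ((Wg g : Nat) : Int) i ≠ 'X' then i else -1)) i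
      = if chAt g (cellI (Wg g) i).1 (cellI (Wg g) i).2 ≠ 'X' then i else -1 := by
  have h := PySem.List.pyGetD_map_pyRange_of_nonneg
    (fun i => if gch g ((Wg g : Nat) : Int) i ≠ 'X' then i else -1) (NI g) i (-1) hi0 hiN
  unfold lg
  rw [h]
  rfl

theorem label0_good (g : List (List Char)) (hW : 0 < (Wg g : Int)) :
    GoodL g ((PySem.List.pyRange 0 (NI g) 1).map
      (fun i => if gch g ((Wg g : Nat) : Int) i ≠ 'X' then i else -1)) := by
  intro i hi0 hiN
  rw [label0_lg g hW i hi0 hiN]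
  have hin : inR g (cellI (Wg g) i) := inR_cellI i hW hi0 hiN
  constructor
  · intro hl
    rw [if_pos hl.2]
    exact ⟨hi0, hiN, Relation.ReflTransGen.refl⟩
  · intro hl
    rw [if_neg (fun hx => hl ⟨hin, hx⟩)]

-- the fixpoint label assignment: constant on components, minimal index of the component
theorem lab_adj_le (g : List (List Char)) (hW : 0 < (Wg g : Int)) (l : List Int)
    (hG : GoodL g l) (hfix : FixL (g.length : Int) (Wg g : Int) l)
    (i j : Int) (hi0 : 0 ≤ i) (hiN : i < NI g) (hj0 : 0 ≤ j) (hjN : j < NI g)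
    (hli : landP g (cellI (Wg g) i)) (hlj : landP g (cellI (Wg g) j))
    (hadj : adjP (cellI (Wg g) i) (cellI (Wg g) j)) : lg l i ≤ lg l j := by
  have hji : j ∈ nbrs (g.length : Int) (Wg g : Int) i :=
    nbrs_complete _ _ i j hW hi0 hiN hj0 hjN hadj
  have hgi := (hG i hi0 hiN).1 hli
  have hgj := (hG j hj0 hjN).1 hlj
  rcases hfix i hi0 hiN with h1 | h1
  · omega
  · have := h1 j hji
    omega

theorem lab_reach_eq (g : List (List Char)) (hW : 0 < (Wg g : Int)) (l : List Int)
    (hG : GoodL g l) (hfix : FixL (g.length : Int) (Wg g : Int) l) :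
    ∀ c c' : Int × Int, reach g c c' →
      lg l (idxg ((Wg g : Nat) : Int) c) = lg l (idxg ((Wg g : Nat) : Int) c') := by
  intro c c' hr
  induction hr with
  | refl => rfl
  | tail h1 h2 ih =>
    rename_i b c2
    obtain ⟨hlb, hlc, hadj⟩ := h2
    obtain ⟨hib0, hibN⟩ := idxg_inR b hlb.1
    obtain ⟨hic0, hicN⟩ := idxg_inR c2 hlc.1
    have hcb : cellI (Wg g) (idxg ((Wg g : Nat) : Int) b) = b :=
      cellI_idxg _ b hW hlb.1.2.2.1 hlb.1.2.2.2
    have hcc : cellI (Wg g) (idxg ((Wg g : Nat) : Int) c2) = c2 :=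
      cellI_idxg _ c2 hW hlc.1.2.2.1 hlc.1.2.2.2
    have e1 : lg l (idxg ((Wg g : Nat) : Int) b) ≤ lg l (idxg ((Wg g : Nat) : Int) c2) :=
      lab_adj_le g hW l hG hfix _ _ hib0 hibN hic0 hicN (by rw [hcb]; exact hlb)
        (by rw [hcc]; exact hlc) (by rw [hcb, hcc]; exact hadj)
    have e2 : lg l (idxg ((Wg g : Nat) : Int) c2) ≤ lg l (idxg ((Wg g : Nat) : Int) b) :=
      lab_adj_le g hW l hG hfix _ _ hic0 hicN hib0 hibN (by rw [hcc]; exact hlc)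
        (by rw [hcb]; exact hlb) (by rw [hcb, hcc]; exact adjP_symm hadj)
    omega

-- bundled characterization of the final labels
theorem lab_char (g : List (List Char)) (hW : 0 < (Wg g : Int)) (l : List Int)
    (hG : GoodL g l) (hfix : FixL (g.length : Int) (Wg g : Int) l)
    (hinit : ∀ k, 0 ≤ k → k < NI g → landP g (cellI (Wg g) k) → lg l k ≤ k) :
    (∀ i, 0 ≤ i → i < NI g → landP g (cellI (Wg g) i) →
      0 ≤ lg l i ∧ lg l i < NI g ∧ landP g (cellI (Wg g) (lg l i)) ∧
      reach g (cellI (Wg g) i) (cellI (Wg g) (lg l i)) ∧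
      lg l (lg l i) = lg l i ∧ lg l i ≤ i) ∧
    (∀ i j, 0 ≤ i → i < NI g → 0 ≤ j → j < NI g →
      landP g (cellI (Wg g) i) → landP g (cellI (Wg g) j) →
      (lg l i = lg l j ↔ reach g (cellI (Wg g) i) (cellI (Wg g) j))) := by
  have key : ∀ i, 0 ≤ i → i < NI g → landP g (cellI (Wg g) i) →
      lg l (lg l i) = lg l i ∧ landP g (cellI (Wg g) (lg l i)) := by
    intro i hi0 hiN hland
    obtain ⟨hv0, hvN, hreach⟩ := (hG i hi0 hiN).1 hland
    have hlm : landP g (cellI (Wg g) (lg l i)) := reach_land hreach hland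
    have heq := lab_reach_eq g hW l hG hfix _ _ hreach
    rw [idxg_cellI] at heq
    have hroll : idxg ((Wg g : Nat) : Int) (cellI (Wg g) (lg l i)) = lg l i := idxg_cellI _ _
    rw [hroll] at heq
    exact ⟨heq.symm, hlm⟩
  constructor
  · intro i hi0 hiN hland
    obtain ⟨hv0, hvN, hreach⟩ := (hG i hi0 hiN).1 hland
    obtain ⟨hidem, hlm⟩ := key i hi0 hiN hland
    refine ⟨hv0, hvN, hlm, hreach, hidem, ?_⟩
    -- minimality at i itself via reach refl: lg l i = lg l i ≤ ... use hinit at i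
    exact hinit i hi0 hiN hland
  · intro i j hi0 hiN hj0 hjN hli hlj
    constructor
    · intro heq
      obtain ⟨_, _, hri⟩ := (hG i hi0 hiN).1 hli
      obtain ⟨_, _, hrj⟩ := (hG j hj0 hjN).1 hlj
      rw [heq] at hri
      exact hri.trans (reach_symm hrj)
    · intro hr
      have := lab_reach_eq g hW l hG hfix _ _ hr
      rwa [idxg_cellI, idxg_cellI] at this

-- ===== aligning A's scan+BFS with B's label grouping =====
def seedsOf (g : List (List Char)) (l : List Int) (P : List (Int × Int)) : List Int :=
  P.filterMap (fun c =>
    if chAt g c.1 c.2 ≠ 'X' ∧ lg l (idxg ((Wg g : Nat) : Int) c) = idxg ((Wg g : Nat) : Int) c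
    then some (idxg ((Wg g : Nat) : Int) c) else none)

def psumOf (g : List (List Char)) (l : List Int) (P : List (Int × Int)) (m : Int) : Int :=
  (P.map (fun c =>
    if chAt g c.1 c.2 ≠ 'X' ∧ lg l (idxg ((Wg g : Nat) : Int) c) = m
    then digitVal g c.1 c.2 else 0)).sum

-- B's dict step, reindexed by cells (fold over allCells via idxg)
def dstep (g : List (List Char)) (l : List Int) (d : PySem.Dict Int Int) (c : Int × Int) :
    PySem.Dict Int Int :=
  if 0 ≤ lg l (idxg ((Wg g : Nat) : Int) c) then
    d.insert (lg l (idxg ((Wg g : Nat) : Int) c))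
      (d.getD (lg l (idxg ((Wg g : Nat) : Int) c)) 0
        + digit1 g ((Wg g : Nat) : Int) (idxg ((Wg g : Nat) : Int) c))
  else d

theorem digit1_idx (g : List (List Char)) (hW : 0 < (Wg g : Int)) (c : Int × Int)
    (hc : inR g c) :
    digit1 g ((Wg g : Nat) : Int) (idxg ((Wg g : Nat) : Int) c) = digitVal g c.1 c.2 := by
  have h : cellI (Wg g) (idxg ((Wg g : Nat) : Int) c) = c :=
    cellI_idxg _ c hW hc.2.2.1 hc.2.2.2
  show digitVal g (cellI (Wg g) (idxg ((Wg g : Nat) : Int) c)).1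
      (cellI (Wg g) (idxg ((Wg g : Nat) : Int) c)).2 = digitVal g c.1 c.2
  rw [h]

theorem seedsOf_append (g : List (List Char)) (l : List Int) (P : List (Int × Int))
    (c : Int × Int) :
    seedsOf g l (P ++ [c]) = seedsOf g l P ++
      (if chAt g c.1 c.2 ≠ 'X' ∧ lg l (idxg ((Wg g : Nat) : Int) c) = idxg ((Wg g : Nat) : Int) c
       then [idxg ((Wg g : Nat) : Int) c] else []) := by
  rw [seedsOf, List.filterMap_append]
  congr 1
  split_ifs <;> simp_all [seedsOf]

theorem psumOf_append (g : List (List Char)) (l : List Int) (P : List (Int × Int))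
    (c : Int × Int) (m : Int) :
    psumOf g l (P ++ [c]) m = psumOf g l P m +
      (if chAt g c.1 c.2 ≠ 'X' ∧ lg l (idxg ((Wg g : Nat) : Int) c) = m
       then digitVal g c.1 c.2 else 0) := by
  simp [psumOf]

theorem seedsOf_mem (g : List (List Char)) (l : List Int) (P : List (Int × Int)) (m : Int) :
    m ∈ seedsOf g l P ↔ ∃ p ∈ P, chAt g p.1 p.2 ≠ 'X' ∧
      lg l (idxg ((Wg g : Nat) : Int) p) = idxg ((Wg g : Nat) : Int) p ∧
      idxg ((Wg g : Nat) : Int) p = m := by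
  rw [seedsOf, List.mem_filterMap]
  constructor
  · rintro ⟨p, hp, he⟩
    split_ifs at he with hcond
    exact ⟨p, hp, hcond.1, hcond.2, by injection he⟩
  · rintro ⟨p, hp, h1, h2, h3⟩
    exact ⟨p, hp, by rw [if_pos ⟨h1, h2⟩, h3]⟩

theorem seedsOf_pairwise (g : List (List Char)) (l : List Int) (P : List (Int × Int))
    (h : P.Pairwise (fun a b => idxg ((Wg g : Nat) : Int) a < idxg ((Wg g : Nat) : Int) b)) :
    (seedsOf g l P).Pairwise (· < ·) := by
  refine List.Pairwise.filterMap _ ?_ h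
  intro a b hab x hx y hy
  split_ifs at hx hy <;> simp_all

set_option maxHeartbeats 4000000 in
theorem joint_fold (g : List (List Char)) (hW : 0 < (Wg g : Int)) (l : List Int)
    (C1 : ∀ i, 0 ≤ i → i < NI g → landP g (cellI (Wg g) i) →
      0 ≤ lg l i ∧ lg l i < NI g ∧ landP g (cellI (Wg g) (lg l i)) ∧
      reach g (cellI (Wg g) i) (cellI (Wg g) (lg l i)) ∧
      lg l (lg l i) = lg l i ∧ lg l i ≤ i)
    (C2 : ∀ i j, 0 ≤ i → i < NI g → 0 ≤ j → j < NI g →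
      landP g (cellI (Wg g) i) → landP g (cellI (Wg g) j) →
      (lg l i = lg l j ↔ reach g (cellI (Wg g) i) (cellI (Wg g) j)))
    (C3 : ∀ i, 0 ≤ i → i < NI g → ¬ landP g (cellI (Wg g) i) → lg l i = -1) :
    ∀ (cs P : List (Int × Int)) (v : List (List Int)) (acc : List Int)
      (d : PySem.Dict Int Int),
    allCells g = P ++ cs →
    shapeOf g v →
    (∀ c, inR g c → (mkd v c ↔ landP g c ∧ ∃ s ∈ P, landP g s ∧ reach g s c)) →
    acc = (seedsOf g l P).map (fun m => psumOf g l (allCells g) m) →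
    d.items = (seedsOf g l P).map (fun m => (m, psumOf g l P m)) →
    (cs.foldl (stepCell g) (acc, v)).1
        = (seedsOf g l (allCells g)).map (fun m => psumOf g l (allCells g) m) ∧
    (cs.foldl (dstep g l) d).items
        = (seedsOf g l (allCells g)).map (fun m => (m, psumOf g l (allCells g) m)) := by
  intro cs
  induction cs with
  | nil =>
    intro P v acc d hsplit _ _ hacc hitems
    have hP : P = allCells g := by rw [hsplit, List.append_nil]
    subst hP
    exact ⟨by rw [List.foldl_nil]; exact hacc, by rw [List.foldl_nil]; exact hitems⟩
  | cons c cs ih =>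
    intro P v acc d hsplit hsh hmkd hacc hitems
    have hcmem : c ∈ allCells g := by
      rw [hsplit]; exact List.mem_append_right _ List.mem_cons_self
    have hcin : inR g c := mem_allCells.mp hcmem
    obtain ⟨hi0, hiN⟩ := idxg_inR c hcin
    have hcell : cellI (Wg g) (idxg ((Wg g : Nat) : Int) c) = c :=
      cellI_idxg _ c hW hcin.2.2.1 hcin.2.2.2
    have hpar := allCells_pairwise g
    rw [hsplit] at hpar
    obtain ⟨hPp, hcp, hcross⟩ := List.pairwise_append.mp hpar
    have hPlt : ∀ s ∈ P, idxg ((Wg g : Nat) : Int) s < idxg ((Wg g : Nat) : Int) c :=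
      fun s hs => hcross s hs c List.mem_cons_self
    have hcs2 : ∀ t ∈ cs, idxg ((Wg g : Nat) : Int) c < idxg ((Wg g : Nat) : Int) t :=
      fun t ht => (List.pairwise_cons.mp hcp).1 t ht
    have hbefore : ∀ z ∈ allCells g,
        idxg ((Wg g : Nat) : Int) z < idxg ((Wg g : Nat) : Int) c → z ∈ P := by
      intro z hz hlt
      rw [hsplit] at hz
      rcases List.mem_append.mp hz with h | h
      · exact h
      · rcases List.mem_cons.mp h with rfl | h2
        · omega
        · have := hcs2 z h2; omega
    have hseedlt : ∀ m ∈ seedsOf g l P, m < idxg ((Wg g : Nat) : Int) c := by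
      intro m hm
      rcases (seedsOf_mem g l P m).mp hm with ⟨p, hp, _, _, hpm⟩
      have := hPlt p hp
      omega
    have hsp : (seedsOf g l P).Pairwise (· < ·) := seedsOf_pairwise g l P hPp
    have hnd : (seedsOf g l P).Nodup := hsp.imp (fun h => ne_of_lt h)
    have hkeys : d.keys = seedsOf g l P := by
      show d.items.map Prod.fst = _
      rw [hitems, List.map_map]
      simp [Function.comp_def]
    have hkeysnd : d.keys.Nodup := by rw [hkeys]; exact hnd
    have hsplit' : allCells g = (P ++ [c]) ++ cs := by
      rw [hsplit, List.append_assoc, List.singleton_append]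
    by_cases hxc : chAt g c.1 c.2 = 'X'
    · -- water cell: both programs skip it
      have hnland : ¬ landP g c := fun hl => hl.2 hxc
      have hlgc : lg l (idxg ((Wg g : Nat) : Int) c) = -1 :=
        C3 _ hi0 hiN (by rw [hcell]; exact hnland)
      have hstepA : stepCell g (acc, v) c = (acc, v) := by
        simp only [stepCell]
        rw [if_neg]
        rintro ⟨_, hx2⟩
        exact hx2 hxc
      have hstepB : dstep g l d c = d := by
        unfold dstep
        rw [if_neg (by omega)]
      have hmkd' : ∀ z, inR g z →
          (mkd v z ↔ landP g z ∧ ∃ s ∈ P ++ [c], landP g s ∧ reach g s z) := by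
        intro z hz
        rw [hmkd z hz]
        constructor
        · rintro ⟨hl, s, hs, hls, hr⟩
          exact ⟨hl, s, List.mem_append_left _ hs, hls, hr⟩
        · rintro ⟨hl, s, hs, hls, hr⟩
          rcases List.mem_append.mp hs with h | h
          · exact ⟨hl, s, h, hls, hr⟩
          · rcases List.mem_singleton.mp h with rfl
            exact absurd hls hnland
      have hacc' : acc = (seedsOf g l (P ++ [c])).map
          (fun m => psumOf g l (allCells g) m) := by
        rw [seedsOf_append, if_neg (by rintro ⟨h1, _⟩; exact h1 hxc), List.append_nil]
        exact hacc
      have hitems' : d.items = (seedsOf g l (P ++ [c])).map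
          (fun m => (m, psumOf g l (P ++ [c]) m)) := by
        rw [seedsOf_append, if_neg (by rintro ⟨h1, _⟩; exact h1 hxc), List.append_nil, hitems]
        refine List.map_congr_left ?_
        intro m _
        rw [psumOf_append, if_neg (by rintro ⟨h1, _⟩; exact h1 hxc), add_zero]
      rw [List.foldl_cons, List.foldl_cons, hstepA, hstepB]
      exact ih (P ++ [c]) v acc d hsplit' hsh hmkd' hacc' hitems'
    · have hlandc : landP g c := ⟨hcin, hxc⟩
      have hlandci : landP g (cellI (Wg g) (idxg ((Wg g : Nat) : Int) c)) := by
        rw [hcell]; exact hlandc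
      obtain ⟨hm0, hmN, hlm, hreachm, hidem, hmle⟩ := C1 _ hi0 hiN hlandci
      by_cases hvis : mkd v c
      · -- already-visited land cell: A skips, B updates the existing dict entry
        obtain ⟨_, s, hsP, hlands, hrs⟩ := (hmkd c hcin).mp hvis
        obtain ⟨hs0, hsN⟩ := idxg_inR s hlands.1
        have hcells : cellI (Wg g) (idxg ((Wg g : Nat) : Int) s) = s :=
          cellI_idxg _ s hW hlands.1.2.2.1 hlands.1.2.2.2
        have hlandsi : landP g (cellI (Wg g) (idxg ((Wg g : Nat) : Int) s)) := by
          rw [hcells]; exact hlands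
        have heq : lg l (idxg ((Wg g : Nat) : Int) c) = lg l (idxg ((Wg g : Nat) : Int) s) := by
          rw [C2 _ _ hi0 hiN hs0 hsN hlandci hlandsi, hcell, hcells]
          exact reach_symm hrs
        have hmlts := (C1 _ hs0 hsN hlandsi).2.2.2.2.2
        have hmlt : lg l (idxg ((Wg g : Nat) : Int) c) < idxg ((Wg g : Nat) : Int) c := by
          have := hPlt s hsP
          omega
        have hcmP : cellI (Wg g) (lg l (idxg ((Wg g : Nat) : Int) c)) ∈ P :=
          hbefore _ (mem_allCells.mpr hlm.1) (by rw [idxg_cellI]; exact hmlt)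
        have hmseed : lg l (idxg ((Wg g : Nat) : Int) c) ∈ seedsOf g l P :=
          (seedsOf_mem g l P _).mpr
            ⟨_, hcmP, hlm.2, by rw [idxg_cellI]; exact hidem, idxg_cellI _ _⟩
        have hcontains : d.contains (lg l (idxg ((Wg g : Nat) : Int) c)) = true := by
          rw [PySem.Dict.contains_iff_mem_keys, hkeys]
          exact hmseed
        have hgetD : d.getD (lg l (idxg ((Wg g : Nat) : Int) c)) 0
            = psumOf g l P (lg l (idxg ((Wg g : Nat) : Int) c)) := by
          refine PySem.Dict.getD_of_mem_items d ?_ hkeysnd 0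
          rw [hitems]
          exact List.mem_map_of_mem hmseed
        have hseeds' : seedsOf g l (P ++ [c]) = seedsOf g l P := by
          rw [seedsOf_append, if_neg (by rintro ⟨_, hii⟩; omega), List.append_nil]
        have hstepB : (dstep g l d c).items = (seedsOf g l (P ++ [c])).map
            (fun m' => (m', psumOf g l (P ++ [c]) m')) := by
          unfold dstep
          rw [if_pos (by omega)]
          rw [PySem.Dict.items_insert_of_contains d _ hcontains, hitems, List.map_map,
            hseeds']
          refine List.map_congr_left ?_
          intro m' hm'
          simp only [Function.comp]
          by_cases hmm : m' = lg l (idxg ((Wg g : Nat) : Int) c)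
          · subst hmm
            rw [if_pos (by simp)]
            rw [psumOf_append, if_pos ⟨hxc, rfl⟩, hgetD,
              digit1_idx g hW c hcin]
          · rw [if_neg (by simpa using hmm)]
            rw [psumOf_append, if_neg (by rintro ⟨_, he⟩; exact hmm he.symm), add_zero]
        have hstepA : stepCell g (acc, v) c = (acc, v) := by
          simp only [stepCell]
          rw [if_neg]
          rintro ⟨h1, _⟩
          exact hvis h1
        have hmkd' : ∀ z, inR g z →
            (mkd v z ↔ landP g z ∧ ∃ s' ∈ P ++ [c], landP g s' ∧ reach g s' z) := by
          intro z hz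
          rw [hmkd z hz]
          constructor
          · rintro ⟨hl, s', hs', hls', hr⟩
            exact ⟨hl, s', List.mem_append_left _ hs', hls', hr⟩
          · rintro ⟨hl, s', hs', hls', hr⟩
            rcases List.mem_append.mp hs' with h | h
            · exact ⟨hl, s', h, hls', hr⟩
            · rcases List.mem_singleton.mp h with rfl
              exact ⟨hl, s, hsP, hlands, hrs.trans hr⟩
        have hacc' : acc = (seedsOf g l (P ++ [c])).map
            (fun m => psumOf g l (allCells g) m) := by
          rw [hseeds']; exact hacc
        rw [List.foldl_cons, List.foldl_cons, hstepA]
        exact ih (P ++ [c]) v acc (dstep g l d c) hsplit' hsh hmkd' hacc' hstepB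
      · -- fresh land cell: A runs its BFS, B opens a new dict entry
        have hveq : vget v c.1 c.2 = 0 := not_not.mp hvis
        have hseedeq : lg l (idxg ((Wg g : Nat) : Int) c) = idxg ((Wg g : Nat) : Int) c := by
          by_contra hne
          have hmlt : lg l (idxg ((Wg g : Nat) : Int) c) < idxg ((Wg g : Nat) : Int) c :=
            lt_of_le_of_ne hmle hne
          have hcmP : cellI (Wg g) (lg l (idxg ((Wg g : Nat) : Int) c)) ∈ P :=
            hbefore _ (mem_allCells.mpr hlm.1) (by rw [idxg_cellI]; exact hmlt)
          have hreach2 : reach g c (cellI (Wg g) (lg l (idxg ((Wg g : Nat) : Int) c))) := by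
            have h2 := hreachm
            rw [hcell] at h2
            exact h2
          exact hvis ((hmkd c hcin).mpr ⟨hlandc, _, hcmP, hlm, reach_symm hreach2⟩)
        have hml : ∀ z, inR g z → mkd v z → landP g z := fun z hz hm => ((hmkd z hz).mp hm).1
        have hcl : ∀ z, inR g z → mkd v z → ∀ b, stp g z b → mkd v b := by
          intro z hz hm b hb
          obtain ⟨hlz, s, hsP, hls, hr⟩ := (hmkd z hz).mp hm
          exact (hmkd b hb.2.1.1).mpr ⟨hb.2.1, s, hsP, hls, hr.tail hb⟩
        obtain ⟨b1, b2, b3, b4, b5, b6⟩ := bfs_spec g c v hlandc hsh hml hcl hvis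
        have hsum : (bfs g c v).1
            = psumOf g l (allCells g) (idxg ((Wg g : Nat) : Int) c) := by
          rw [b6, relSum, psumOf]
          refine sum_map_congr_mem _ _ _ ?_
          intro z hzm
          have hz : inR g z := mem_allCells.mp hzm
          obtain ⟨hz0, hzN⟩ := idxg_inR z hz
          have hcz : cellI (Wg g) (idxg ((Wg g : Nat) : Int) z) = z :=
            cellI_idxg _ z hW hz.2.2.1 hz.2.2.2
          refine if_congr ?_ rfl rfl
          rw [b3 z hz]
          constructor
          · intro hr
            have hlz : landP g z := reach_land hr hlandc
            refine ⟨hlz.2, ?_⟩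
            have he2 : lg l (idxg ((Wg g : Nat) : Int) z)
                = lg l (idxg ((Wg g : Nat) : Int) c) :=
              (C2 _ _ hz0 hzN hi0 hiN (by rw [hcz]; exact hlz) hlandci).mpr
                (by rw [hcz, hcell]; exact reach_symm hr)
            rw [he2, hseedeq]
          · rintro ⟨hchz, hlgz⟩
            have hlz : landP g z := ⟨hz, hchz⟩
            have he2 : reach g (cellI (Wg g) (idxg ((Wg g : Nat) : Int) z))
                (cellI (Wg g) (idxg ((Wg g : Nat) : Int) c)) :=
              (C2 _ _ hz0 hzN hi0 hiN (by rw [hcz]; exact hlz) hlandci).mp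
                (by rw [hlgz, hseedeq])
            rw [hcz, hcell] at he2
            exact reach_symm he2
        have hstepA : stepCell g (acc, v) c
            = (acc ++ [(bfs g c v).1], (bfs g c v).2) := by
          simp only [stepCell]
          rw [if_pos ⟨hveq, hxc⟩]
        have hseeds' : seedsOf g l (P ++ [c])
            = seedsOf g l P ++ [idxg ((Wg g : Nat) : Int) c] := by
          rw [seedsOf_append, if_pos ⟨hxc, hseedeq⟩]
        have hpsum0 : psumOf g l P (idxg ((Wg g : Nat) : Int) c) = 0 := by
          rw [psumOf]
          refine List.sum_eq_zero ?_
          intro z hzmm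
          rcases List.mem_map.mp hzmm with ⟨p, hpP, rfl⟩
          rw [if_neg]
          rintro ⟨hchp, hlgp⟩
          have hpin : inR g p := mem_allCells.mp (by rw [hsplit]; exact List.mem_append_left _ hpP)
          obtain ⟨hp0, hpN⟩ := idxg_inR p hpin
          have hcp : cellI (Wg g) (idxg ((Wg g : Nat) : Int) p) = p :=
            cellI_idxg _ p hW hpin.2.2.1 hpin.2.2.2
          have hle := (C1 _ hp0 hpN (by rw [hcp]; exact ⟨hpin, hchp⟩)).2.2.2.2.2
          have := hPlt p hpP
          omega
        have hnotmem : idxg ((Wg g : Nat) : Int) c ∉ d.keys := by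
          rw [hkeys]
          intro hmem
          have := hseedlt _ hmem
          omega
        have hcontains : d.contains (idxg ((Wg g : Nat) : Int) c) = false := by
          cases hb : d.contains (idxg ((Wg g : Nat) : Int) c)
          · rfl
          · exact absurd ((PySem.Dict.contains_iff_mem_keys _ _).mp hb) hnotmem
        have hstepB : (dstep g l d c).items = (seedsOf g l (P ++ [c])).map
            (fun m' => (m', psumOf g l (P ++ [c]) m')) := by
          unfold dstep
          rw [if_pos (by rw [hseedeq]; exact hi0), hseedeq,
            PySem.Dict.items_insert_of_not_contains d _ hcontains,
            PySem.Dict.getD_of_not_contains d 0 hcontains, hitems, hseeds', List.map_append]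
          congr 1
          · refine List.map_congr_left ?_
            intro m' hm'
            rw [psumOf_append, if_neg, add_zero]
            rintro ⟨_, he⟩
            have := hseedlt m' hm'
            omega
          · rw [List.map_singleton, psumOf_append, if_pos ⟨hxc, hseedeq⟩, hpsum0,
              digit1_idx g hW c hcin]
        have hacc' : acc ++ [(bfs g c v).1] = (seedsOf g l (P ++ [c])).map
            (fun m => psumOf g l (allCells g) m) := by
          rw [hseeds', List.map_append, hacc, List.map_singleton, hsum]
        have hmkd' : ∀ z, inR g z → (mkd (bfs g c v).2 z ↔
            landP g z ∧ ∃ s ∈ P ++ [c], landP g s ∧ reach g s z) := by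
          intro z hz
          rw [b2 z hz]
          constructor
          · rintro (hm | hr)
            · obtain ⟨hlz, s, hsP, hls, hrs⟩ := (hmkd z hz).mp hm
              exact ⟨hlz, s, List.mem_append_left _ hsP, hls, hrs⟩
            · exact ⟨reach_land hr hlandc, c,
                List.mem_append_right _ (List.mem_singleton.mpr rfl), hlandc, hr⟩
          · rintro ⟨hlz, s, hs, hls, hr⟩
            rcases List.mem_append.mp hs with h | h
            · exact Or.inl ((hmkd z hz).mpr ⟨hlz, s, h, hls, hr⟩)
            · rcases List.mem_singleton.mp h with rfl
              exact Or.inr hr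
        rw [List.foldl_cons, List.foldl_cons, hstepA]
        exact ih (P ++ [c]) (bfs g c v).2 (acc ++ [(bfs g c v).1]) (dstep g l d c)
          hsplit' b1 hmkd' hacc' hstepB

theorem foldl_const_state {α σ : Type} (L : List α) (st : σ) :
    L.foldl (fun st _ => st) st = st := by
  induction L generalizing st with
  | nil => rfl
  | cons a L ih => exact ih st

theorem ite_empty_sorted_congr (X Y : List Int) (h : X = Y) :
    (if X = [] then [-1] else PySem.List.sorted X (fun a => a) false)
      = (if Y = [] then [-1] else PySem.List.sorted Y (fun a => a) false) := by
  rw [h]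

theorem solution_eq_alt (maps : List String) : solution maps = solution_alt maps := by
  unfold solution solution_alt
  set g := maps.map (fun m => m.toList) with hg
  simp only []
  by_cases hWpos : 0 < ((g.headD []).length : Int)
  · -- main case: at least one column
    have hW : 0 < ((Wg g : Nat) : Int) := hWpos
    have hG0 := label0_good g hW
    obtain ⟨hGf, hmonof, hfixf⟩ := fixLoop_props g hW
      ((PySem.List.pyRange 0 (NI g) 1).map
        (fun i => if gch g ((Wg g : Nat) : Int) i ≠ 'X' then i else -1)) hG0
    set lab := fixLoop (g.length : Int) ((Wg g : Nat) : Int)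
      ((PySem.List.pyRange 0 (NI g) 1).map
        (fun i => if gch g ((Wg g : Nat) : Int) i ≠ 'X' then i else -1)) with hlab
    have hinit : ∀ k, 0 ≤ k → k < NI g → landP g (cellI (Wg g) k) → lg lab k ≤ k := by
      intro k hk0 hkN hl
      have h1 := hmonof k hk0
      rw [label0_lg g hW k hk0 hkN, if_pos hl.2] at h1
      exact h1
    obtain ⟨C1, C2⟩ := lab_char g hW lab hGf hfixf hinit
    have C3 : ∀ i, 0 ≤ i → i < NI g → ¬ landP g (cellI (Wg g) i) → lg lab i = -1 :=
      fun i h1 h2 h3 => (hGf i h1 h2).2 h3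
    have hsh0 : shapeOf g (List.replicate g.length (List.replicate (Wg g) (0 : Int))) := by
      constructor
      · exact List.length_replicate
      · intro r hr
        rw [List.eq_of_mem_replicate hr]
        exact List.length_replicate
    have hmkd0 : ∀ c, inR g c →
        (mkd (List.replicate g.length (List.replicate (Wg g) (0 : Int))) c ↔
          landP g c ∧ ∃ s ∈ ([] : List (Int × Int)), landP g s ∧ reach g s c) := by
      intro c hc
      constructor
      · intro hm
        exact absurd (vget_replicate0 hc.1 hc.2.1 hc.2.2.1 hc.2.2.2) hm
      · rintro ⟨_, s, hs, _⟩
        simp at hs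
    obtain ⟨hAfold, hBfold⟩ := joint_fold g hW lab C1 C2 C3 (allCells g) []
      (List.replicate g.length (List.replicate (Wg g) (0 : Int))) [] PySem.Dict.empty
      (List.nil_append _).symm hsh0 hmkd0 rfl rfl
    have hfold : ((PySem.List.pyRange 0 ((g.length : Nat) : Int) 1).foldl
        (fun (st : List Int × List (List Int)) y =>
          (PySem.List.pyRange 0 ((Wg g : Nat) : Int) 1).foldl (fun st x =>
            if vget st.2 y x = 0 ∧ chAt g y x ≠ 'X' then
              ((st.1 ++ [(bfs g (y, x) st.2).1], (bfs g (y, x) st.2).2))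
            else st) st) ([], List.replicate g.length (List.replicate (Wg g) (0 : Int))))
        = (allCells g).foldl (stepCell g)
            ([], List.replicate g.length (List.replicate (Wg g) (0 : Int))) := by
      rw [allCells, List.foldl_flatMap]
      simp only [List.foldl_map]
      rfl
    have htally : tally g ((Wg g : Nat) : Int) lab (NI g)
        = (allCells g).foldl (dstep g lab) PySem.Dict.empty := by
      rw [tally, ← map_idx_allCells g, List.foldl_map]
      rfl
    have hvals : (tally g ((Wg g : Nat) : Int) lab (NI g)).values
        = (seedsOf g lab (allCells g)).map (fun m => psumOf g lab (allCells g) m) := by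
      show ((tally g ((Wg g : Nat) : Int) lab (NI g)).items).map (fun x => x.2) = _
      rw [htally, hBfold, List.map_map]
      simp [Function.comp_def]
    have key : ((PySem.List.pyRange 0 ((g.length : Nat) : Int) 1).foldl
        (fun (st : List Int × List (List Int)) y =>
          (PySem.List.pyRange 0 ((Wg g : Nat) : Int) 1).foldl (fun st x =>
            if vget st.2 y x = 0 ∧ chAt g y x ≠ 'X' then
              ((st.1 ++ [(bfs g (y, x) st.2).1], (bfs g (y, x) st.2).2))
            else st) st) ([], List.replicate g.length (List.replicate (Wg g) (0 : Int)))).1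
        = (tally g ((Wg g : Nat) : Int) lab (NI g)).values := by
      rw [hfold, hvals]
      exact hAfold
    exact ite_empty_sorted_congr _ _ key
  · -- degenerate case: zero columns, no cells at all; both programs return [-1]
    have hlen0 : (g.headD []).length = 0 := by omega
    rw [hlen0]
    have hr0 : PySem.List.pyRange 0 ((0 : Nat) : Int) 1 = [] := rfl
    have hmul2 : ((g.length : Nat) : Int) * ((0 : Nat) : Int) = ((0 : Nat) : Int) := by simp
    simp only [hmul2, hr0, List.map_nil, List.foldl_nil, foldl_const_state]
    have hfix0 : fixLoop ((g.length : Nat) : Int) ((0 : Nat) : Int) [] = [] := by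
      rw [fixLoop]
      have h1 : onePass ((g.length : Nat) : Int) ((0 : Nat) : Int) [] = ([], false) := by
        rw [onePass, hmul2, hr0, List.foldl_nil]
      rw [dif_neg (by rw [h1]; simp), h1]
    rw [hfix0]
    have htally0 : tally g ((0 : Nat) : Int) [] ((0 : Nat) : Int) = PySem.Dict.empty := by
      rw [tally, hr0, List.foldl_nil]
    rw [htally0]
    rfl

-- ===== VERDICT (by name: the statement is the Claim_ definition above) =====
theorem solution_spec : Claim_equal_solution := by
  intro maps _ _
  unfold Spec_solution
  exact solution_eq_alt maps
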